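-- pv_equiv track=rewrite | github.com/MrBrantCode/unitest_baseline | mut_generate/mist_train_taco/taco_18344/solution.py | minimum_jedi_removals
-- ===== SOURCE A (Python) =====
-- def minimum_jedi_removals(n, m, lightsabers, desired_counts):
--     INF = 1 << 60
--     Constraint = [0] + desired_counts
--     satisfied_color = 0
--
--     for i in range(1, m + 1):
--         if Constraint[i] == 0:
--             satisfied_color += 1
--
--     GETCOLOR = [0] * (n + 1)
--     ans = INF
--     waste = 0
--     pos = 0
--
--     for i in range(n):
--         while satisfied_color < m and pos < n:
--             now_color = lightsabers[pos]
--             GETCOLOR[now_color] += 1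
--             if GETCOLOR[now_color] == Constraint[now_color]:
--                 satisfied_color += 1
--             elif GETCOLOR[now_color] > Constraint[now_color]:
--                 waste += 1
--             pos += 1
--
--         if satisfied_color == m:
--             ans = min(ans, waste)
--
--         removed_color = lightsabers[i]
--         if GETCOLOR[removed_color] > Constraint[removed_color]:
--             GETCOLOR[removed_color] -= 1
--             waste -= 1
--             continue
--         elif GETCOLOR[removed_color] == Constraint[removed_color]:
--             GETCOLOR[removed_color] -= 1
--             satisfied_color -= 1
--
--     return ans if ans < INF else -1
-- ===== SOURCE B (Python) =====
-- def minimum_jedi_removals(n, m, lightsabers, desired_counts):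
--     # Binary search on the window length: feasibility of a window length is
--     # monotone, each length is tested with an O(n) fixed-size rolling window,
--     # and the answer is (minimal feasible length) - sum(desired_counts).
--     need = [0] + desired_counts
--     S = 0
--     base_missing = 0
--     for i in range(1, m + 1):
--         S += need[i]
--         if need[i] > 0:
--             base_missing += 1
--
--     def check(L):
--         # is some window of length exactly L satisfying every desired count?
--         if L == 0:
--             return base_missing == 0
--         count = [0] * (m + 1)
--         missing = base_missing
--         for j in range(L):
--             c = lightsabers[j]
--             count[c] += 1
--             if count[c] == need[c]:
--                 missing -= 1
--         if missing == 0: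
--             return True
--         for j in range(L, n):
--             c = lightsabers[j]
--             count[c] += 1
--             if count[c] == need[c]:
--                 missing -= 1
--             d = lightsabers[j - L]
--             if count[d] == need[d]:
--                 missing += 1
--             count[d] -= 1
--             if missing == 0:
--                 return True
--         return False
--
--     if n <= 0 or not check(n):
--         return -1
--     lo, hi = 0, n
--     while lo < hi:
--         mid = (lo + hi) // 2
--         if check(mid):
--             hi = mid
--         else:
--             lo = mid + 1
--     return lo - S
-- ===== Notes on version B (the rewrite author's own statement) =====
-- stated objective: alternative
-- what changed: Replaces A's incremental two-pointer scan (per-index window maintenance with a running waste counter) by binary search on the window length: feasibility of a length is monotone, each candidate length is tested with an O(n) fixed-size rolling-window check, and the answer is the minimal feasible length minus the sum of the desired counts.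
-- outside the precondition, e.g. on minimum_jedi_removals(1, 1, [1], [-1]): A returns -1, B returns 1; on minimum_jedi_removals(2, -1, [0, 0], []): A returns 0, B raises IndexError; on minimum_jedi_removals(2, 1, [-2, 1], [1]): A returns -1, B returns 0
import Mathlib
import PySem

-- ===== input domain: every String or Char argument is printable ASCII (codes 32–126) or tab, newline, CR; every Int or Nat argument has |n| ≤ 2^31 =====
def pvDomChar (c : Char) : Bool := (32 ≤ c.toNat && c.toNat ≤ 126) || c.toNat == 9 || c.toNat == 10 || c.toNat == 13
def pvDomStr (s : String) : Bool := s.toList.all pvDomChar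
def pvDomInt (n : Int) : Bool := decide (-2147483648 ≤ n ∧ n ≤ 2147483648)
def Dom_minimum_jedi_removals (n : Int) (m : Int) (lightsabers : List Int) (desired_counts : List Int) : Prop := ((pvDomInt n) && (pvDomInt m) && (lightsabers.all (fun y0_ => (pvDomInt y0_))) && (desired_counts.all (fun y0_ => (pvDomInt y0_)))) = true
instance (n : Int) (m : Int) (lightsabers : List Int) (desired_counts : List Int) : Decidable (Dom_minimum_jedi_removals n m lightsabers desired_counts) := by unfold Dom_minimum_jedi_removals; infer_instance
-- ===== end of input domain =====

-- B re-implements A by binary search on the window length (feasibility of a length is monotone,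
-- each candidate length is tested with a fixed-size rolling-window scan; answer = minimal feasible
-- length minus the sum of the desired counts); equal return values proved on Pre_ below
-- (objective: alternative).

-- ===== PORT A =====

-- inner while-loop of A: state (GETCOLOR, satisfied_color, waste, pos); fuel ≥ n - pos
def mjrWhileA (m n : Int) (lightsabers C : List Int) :
    Nat → List Int × Int × Int × Int → List Int × Int × Int × Int
  | 0, st => st
  | fuel + 1, (g, sat, waste, pos) =>
    if sat < m ∧ pos < n then
      let c := PySem.List.pyGetD lightsabers pos 0
      let g' := PySem.List.pySetD g c (PySem.List.pyGetD g c 0 + 1)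
      if PySem.List.pyGetD g' c 0 = PySem.List.pyGetD C c 0 then
        mjrWhileA m n lightsabers C fuel (g', sat + 1, waste, pos + 1)
      else if PySem.List.pyGetD g' c 0 > PySem.List.pyGetD C c 0 then
        mjrWhileA m n lightsabers C fuel (g', sat, waste + 1, pos + 1)
      else
        mjrWhileA m n lightsabers C fuel (g', sat, waste, pos + 1)
    else (g, sat, waste, pos)

-- body of A's outer 'for i in range(n)' loop; state (GETCOLOR, satisfied_color, waste, pos, ans)
def mjrStepA (m n : Int) (lightsabers C : List Int)
    (st : List Int × Int × Int × Int × Int) (i : Int) : List Int × Int × Int × Int × Int :=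
  let (g, sat, waste, pos, ans) := st
  let (g, sat, waste, pos) := mjrWhileA m n lightsabers C (n - pos).toNat (g, sat, waste, pos)
  let ans := if sat = m then min ans waste else ans
  let rc := PySem.List.pyGetD lightsabers i 0
  if PySem.List.pyGetD g rc 0 > PySem.List.pyGetD C rc 0 then
    (PySem.List.pySetD g rc (PySem.List.pyGetD g rc 0 - 1), sat, waste - 1, pos, ans)
  else if PySem.List.pyGetD g rc 0 = PySem.List.pyGetD C rc 0 then
    (PySem.List.pySetD g rc (PySem.List.pyGetD g rc 0 - 1), sat - 1, waste, pos, ans)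
  else (g, sat, waste, pos, ans)

def minimum_jedi_removals (n : Int) (m : Int) (lightsabers : List Int) (desired_counts : List Int) : Int :=
  let INF : Int := 1152921504606846976  -- 1 << 60
  let C : List Int := 0 :: desired_counts
  let sat0 : Int := (PySem.List.pyRange 1 (m + 1) 1).foldl
    (fun s i => if PySem.List.pyGetD C i 0 = 0 then s + 1 else s) 0
  let g0 : List Int := List.replicate (n + 1).toNat 0
  let st := (PySem.List.pyRange 0 n 1).foldl (mjrStepA m n lightsabers C) (g0, sat0, 0, 0, INF)
  if st.2.2.2.2 < INF then st.2.2.2.2 else -1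


-- ===== PORT B =====

-- one step of check's element-adding loops: add lightsabers[j] to the counter, update missing
def mjrAddStep (need ls : List Int) (p : List Int × Int) (j : Int) : List Int × Int :=
  let c := PySem.List.pyGetD ls j 0
  let count := PySem.List.pySetD p.1 c (PySem.List.pyGetD p.1 c 0 + 1)
  let missing := if PySem.List.pyGetD count c 0 = PySem.List.pyGetD need c 0 then p.2 - 1 else p.2
  (count, missing)

-- check's second loop 'for j in range(L, n)' with its early 'return True'
def mjrSlide (need ls : List Int) (L : Int) : List Int → List Int × Int → Bool
  | [], _ => false
  | j :: rest, st =>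
      let st1 := mjrAddStep need ls st j
      let d := PySem.List.pyGetD ls (j - L) 0
      let missing := if PySem.List.pyGetD st1.1 d 0 = PySem.List.pyGetD need d 0 then st1.2 + 1 else st1.2
      let count := PySem.List.pySetD st1.1 d (PySem.List.pyGetD st1.1 d 0 - 1)
      if missing = 0 then true else mjrSlide need ls L rest (count, missing)

-- Source B's check(L): is some window of length exactly L satisfying every desired count?
def mjrCheck (n m : Int) (need ls : List Int) (baseMissing L : Int) : Bool :=
  if L = 0 then baseMissing == 0
  else
    let st := (PySem.List.pyRange 0 L 1).foldl (mjrAddStep need ls)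
      (List.replicate (m + 1).toNat 0, baseMissing)
    if st.2 = 0 then true
    else mjrSlide need ls L (PySem.List.pyRange L n 1) st

-- Source B's 'while lo < hi' binary search; fuel ≥ hi - lo
def mjrBsearch (P : Int → Bool) : Nat → Int → Int → Int
  | 0, lo, _ => lo
  | fuel + 1, lo, hi =>
      if lo < hi then
        let mid := PySem.Int.floordiv (lo + hi) 2
        if P mid then mjrBsearch P fuel lo mid
        else mjrBsearch P fuel (mid + 1) hi
      else lo

def minimum_jedi_removals_alt (n : Int) (m : Int) (lightsabers : List Int) (desired_counts : List Int) : Int :=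
  let need : List Int := 0 :: desired_counts
  let sm := (PySem.List.pyRange 1 (m + 1) 1).foldl
    (fun (p : Int × Int) i =>
      let v := PySem.List.pyGetD need i 0
      (p.1 + v, if v > 0 then p.2 + 1 else p.2)) (0, 0)
  if n ≤ 0 ∨ ¬ (mjrCheck n m need lightsabers sm.2 n = true) then -1
  else mjrBsearch (mjrCheck n m need lightsabers sm.2) n.toNat 0 n - sm.1


-- ===== PRECONDITION & SPEC =====
-- Pre_ restricts to the problem's natural domain (n ≤ 0 with m within desired_counts, or: counts of the
-- first m colors nonnegative, m within desired_counts, n within lightsabers, sabre colors in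
-- [0, min(m, n)]): outside it A either raises
-- IndexError or returns a value that is an accident of negative-index wraparound / array sizing
-- (negative m, negative colors) or of meaningless negative desired counts, corners no caller would
-- specify and on which B's natural behaviour raises or differs (see the cites in claim.json).
def Pre_minimum_jedi_removals (n : Int) (m : Int) (lightsabers : List Int) (desired_counts : List Int) : Prop :=
  (n ≤ 0 ∧ m ≤ (desired_counts.length : Int)) ∨
  (0 < n ∧ n ≤ (lightsabers.length : Int) ∧ 0 ≤ m ∧ m ≤ (desired_counts.length : Int) ∧
    (∀ c ∈ lightsabers.take n.toNat, 0 ≤ c ∧ c ≤ m ∧ c ≤ n) ∧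
    (∀ d ∈ desired_counts.take m.toNat, 0 ≤ d))

instance (n : Int) (m : Int) (lightsabers : List Int) (desired_counts : List Int) : Decidable (Pre_minimum_jedi_removals n m lightsabers desired_counts) := by unfold Pre_minimum_jedi_removals; infer_instance

def pvWitness_minimum_jedi_removals : Int × Int × List Int × List Int := (3, 2, [1, 2, 1], [1, 1])

def Spec_minimum_jedi_removals (n : Int) (m : Int) (lightsabers : List Int) (desired_counts : List Int) (out : Int) : Prop := out = minimum_jedi_removals_alt n m lightsabers desired_counts
instance (n : Int) (m : Int) (lightsabers : List Int) (desired_counts : List Int) (out : Int) : Decidable (Spec_minimum_jedi_removals n m lightsabers desired_counts out) := by unfold Spec_minimum_jedi_removals; infer_instance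

-- ===== CLAIM (what is proved, stated in full; the proofs are below) =====
def Claim_equal_minimum_jedi_removals : Prop := ∀ (n : Int) (m : Int) (lightsabers : List Int) (desired_counts : List Int), Dom_minimum_jedi_removals n m lightsabers desired_counts → Pre_minimum_jedi_removals n m lightsabers desired_counts → Spec_minimum_jedi_removals n m lightsabers desired_counts (minimum_jedi_removals n m lightsabers desired_counts)

-- ===== LEMMAS AND PROOFS =====

-- window count: number of occurrences of color c among indices [l, r) of L
def wcnt (L : List Int) (l r c : Int) : Int := (((L.take r.toNat).drop l.toNat).count c : Nat)

lemma wcnt_nonneg (L : List Int) (l r c : Int) : 0 ≤ wcnt L l r c := Int.natCast_nonneg _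

lemma wcnt_empty (L : List Int) (l r c : Int) (h : r ≤ l) : wcnt L l r c = 0 := by
  unfold wcnt
  rw [List.drop_eq_nil_of_le]
  · simp
  · exact le_trans (List.length_take_le _ _) (by omega)

lemma wcnt_add (L : List Int) (l r c : Int) (hl : 0 ≤ l) (hlr : l ≤ r)
    (hr : r.toNat < L.length) :
    wcnt L l (r + 1) c = wcnt L l r c + (if L.getD r.toNat 0 = c then 1 else 0) := by
  unfold wcnt
  have h1 : (r + 1).toNat = r.toNat + 1 := by omega
  rw [h1, List.take_add_one, List.getElem?_eq_getElem hr]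
  have h2 : l.toNat ≤ (L.take r.toNat).length := by
    simp [List.length_take]; omega
  rw [List.drop_append_of_le_length h2]
  rw [List.count_append]
  rw [List.getD_eq_getElem L 0 hr]
  simp [List.count_singleton, beq_iff_eq]
  all_goals (split <;> split <;> simp_all <;> try omega)

lemma wcnt_sub (L : List Int) (l r c : Int) (hl : 0 ≤ l) (hlr : l < r)
    (hr : r.toNat ≤ L.length) :
    wcnt L (l + 1) r c = wcnt L l r c - (if L.getD l.toNat 0 = c then 1 else 0) := by
  unfold wcnt
  have hlen : l.toNat < (L.take r.toNat).length := by simp [List.length_take]; omega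
  rw [List.drop_eq_getElem_cons hlen]
  have h1 : (l + 1).toNat = l.toNat + 1 := by omega
  rw [h1, List.count_cons]
  have : (L.take r.toNat)[l.toNat] = L.getD l.toNat 0 := by
    rw [List.getElem_take, List.getD_eq_getElem L 0 (by omega)]
  rw [this]
  simp [beq_iff_eq]
  all_goals (split <;> split <;> simp_all <;> try omega)

lemma wcnt_mono_r (L : List Int) (l r r' c : Int) (hl : 0 ≤ l) (hlr : l ≤ r) (hrr : r ≤ r')
    (hr' : r'.toNat ≤ L.length) : wcnt L l r c ≤ wcnt L l r' c := by
  unfold wcnt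
  have h : L.take r.toNat ++ (L.take r'.toNat).drop r.toNat = L.take r'.toNat := by
    have : L.take r.toNat = (L.take r'.toNat).take r.toNat := by
      rw [List.take_take]; congr 1; omega
    rw [this, List.take_append_drop]
  rw [← h]
  have h2 : l.toNat ≤ (L.take r.toNat).length := by simp [List.length_take]; omega
  rw [List.drop_append_of_le_length h2, List.count_append]
  push_cast; omega

lemma wcnt_anti_l (L : List Int) (l l' r c : Int) (hl : 0 ≤ l) (hll : l ≤ l') :
    wcnt L l' r c ≤ wcnt L l r c := by
  unfold wcnt
  have h : (L.take r.toNat).drop l'.toNat = ((L.take r.toNat).drop l.toNat).drop (l'.toNat - l.toNat) := by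
    rw [List.drop_drop]; congr 1; omega
  rw [h]
  exact_mod_cast (List.drop_sublist _ _).count_le c

lemma wcnt_head (L : List Int) (l r : Int) (hl : 0 ≤ l) (hlr : l < r) (hr : r.toNat ≤ L.length) :
    1 ≤ wcnt L l r (L.getD l.toNat 0) := by
  unfold wcnt
  have hlen : l.toNat < (L.take r.toNat).length := by simp [List.length_take]; omega
  rw [List.drop_eq_getElem_cons hlen]
  have : (L.take r.toNat)[l.toNat] = L.getD l.toNat 0 := by
    rw [List.getElem_take, List.getD_eq_getElem L 0 (by omega)]
  rw [this, List.count_cons]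
  simp

lemma wcnt_pos_lt (L : List Int) (l r c : Int) (h : 0 < wcnt L l r c) : l < r := by
  by_contra hc
  rw [wcnt_empty L l r c (by omega)] at h
  omega

-- window statistics
def wsat (L : List Int) (m : Int) (nd : Int → Int) (l r : Int) : Int :=
  ((PySem.List.pyRange 1 (m + 1) 1).map (fun c => if nd c ≤ wcnt L l r c then (1:Int) else 0)).sum

def wmiss (L : List Int) (m : Int) (nd : Int → Int) (l r : Int) : Int :=
  ((PySem.List.pyRange 1 (m + 1) 1).map (fun c => if wcnt L l r c < nd c then (1:Int) else 0)).sum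

def wwaste (L : List Int) (m : Int) (nd : Int → Int) (l r : Int) : Int :=
  ((PySem.List.pyRange 0 (m + 1) 1).map
    (fun c => if nd c ≤ wcnt L l r c then wcnt L l r c - nd c else 0)).sum

def wok (L : List Int) (m : Int) (nd : Int → Int) (l r : Int) : Prop :=
  ∀ c : Int, 1 ≤ c → c ≤ m → nd c ≤ wcnt L l r c

def Sval (m : Int) (nd : Int → Int) : Int := ((PySem.List.pyRange 1 (m + 1) 1).map nd).sum

lemma mjr_foldl_count (l : List Int) (p : Int → Prop) [DecidablePred p] (a : Int) :
    l.foldl (fun s c => if p c then s + 1 else s) a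
      = a + (l.map (fun c => if p c then (1:Int) else 0)).sum := by
  induction l generalizing a with
  | nil => simp
  | cons x xs ih =>
    simp only [List.foldl_cons, List.map_cons, List.sum_cons]
    split <;> rw [ih] <;> ring

lemma mjr_foldl_addf (l : List Int) (f : Int → Int) (a : Int) :
    l.foldl (fun s c => s + f c) a = a + (l.map f).sum := by
  induction l generalizing a with
  | nil => simp
  | cons x xs ih => simp only [List.foldl_cons, List.map_cons, List.sum_cons]; rw [ih]; ring

lemma mjr_sum_ite_le_len (l : List Int) (p : Int → Prop) [DecidablePred p] :
    ((l.map (fun c => if p c then (1:Int) else 0)).sum) ≤ l.length := by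
  induction l with
  | nil => simp
  | cons x xs ih =>
    simp only [List.map_cons, List.sum_cons, List.length_cons]
    split <;> push_cast <;> omega

lemma mjr_sum_ite_nonneg (l : List Int) (p : Int → Prop) [DecidablePred p] :
    0 ≤ (l.map (fun c => if p c then (1:Int) else 0)).sum := by
  induction l with
  | nil => simp
  | cons x xs ih =>
    simp only [List.map_cons, List.sum_cons]
    split <;> omega

lemma mjr_sum_ite_eq_len_iff (l : List Int) (p : Int → Prop) [DecidablePred p] :
    ((l.map (fun c => if p c then (1:Int) else 0)).sum = l.length) ↔ ∀ c ∈ l, p c := by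
  induction l with
  | nil => simp
  | cons x xs ih =>
    have hb := mjr_sum_ite_le_len xs p
    simp only [List.map_cons, List.sum_cons, List.length_cons, List.mem_cons]
    by_cases hp : p x
    · simp only [hp, if_pos]
      constructor
      · intro h c hc
        rcases hc with rfl | hc
        · exact hp
        · exact (ih.mp (by omega)) c hc
      · intro h
        have h2 := ih.mpr (fun c hc => h c (Or.inr hc))
        omega
    · simp only [hp, if_neg, not_false_iff]
      constructor
      · intro h; exfalso; push_cast at h; omega
      · intro h; exact absurd (h x (Or.inl rfl)) hp

lemma mjr_sum_ite_eq_zero_iff (l : List Int) (p : Int → Prop) [DecidablePred p] :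
    ((l.map (fun c => if p c then (1:Int) else 0)).sum = 0) ↔ ∀ c ∈ l, ¬ p c := by
  induction l with
  | nil => simp
  | cons x xs ih =>
    have hb := mjr_sum_ite_nonneg xs p
    simp only [List.map_cons, List.sum_cons, List.mem_cons]
    by_cases hp : p x
    · simp only [hp, if_pos]
      constructor
      · intro h; exfalso; omega
      · intro h; exact absurd hp (h x (Or.inl rfl))
    · simp only [hp, if_neg, not_false_iff]
      constructor
      · intro h c hc
        rcases hc with rfl | hc
        · exact hp
        · exact (ih.mp (by omega)) c hc
      · intro h
        have := ih.mpr (fun c hc => h c (Or.inr hc))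
        omega

lemma mjr_sum_map_sub (l : List Int) (f g : Int → Int) :
    (l.map (fun c => f c - g c)).sum = (l.map f).sum - (l.map g).sum := by
  induction l with
  | nil => simp
  | cons x xs ih => simp only [List.map_cons, List.sum_cons]; rw [ih]; ring

lemma mjr_sum_update (f g : Int → Int) (a b x : Int) (hax : a ≤ x) (hxb : x < b)
    (h : ∀ c, c ≠ x → f c = g c) :
    ((PySem.List.pyRange a b 1).map g).sum = ((PySem.List.pyRange a b 1).map f).sum + (g x - f x) := by
  rw [PySem.List.pyRange_one_append a x b (by omega) (by omega),
      PySem.List.pyRange_one_cons (show x < b by omega)]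
  simp only [List.map_append, List.sum_append, List.map_cons, List.sum_cons]
  have h1 : (PySem.List.pyRange a x 1).map g = (PySem.List.pyRange a x 1).map f := by
    apply List.map_congr_left
    intro c hc
    have := PySem.List.mem_pyRange_one.mp hc
    exact (h c (by omega)).symm
  have h2 : (PySem.List.pyRange (x+1) b 1).map g = (PySem.List.pyRange (x+1) b 1).map f := by
    apply List.map_congr_left
    intro c hc
    have := PySem.List.mem_pyRange_one.mp hc
    exact (h c (by omega)).symm
  rw [h1, h2]; ring

-- congruence and delta lemmas for the window statistics
lemma wsat_congr (L : List Int) (m : Int) (nd : Int → Int) (l r l' r' : Int)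
    (h : ∀ c : Int, 1 ≤ c → c ≤ m → wcnt L l r c = wcnt L l' r' c) :
    wsat L m nd l r = wsat L m nd l' r' := by
  unfold wsat
  congr 1
  apply List.map_congr_left
  intro c hc
  have := PySem.List.mem_pyRange_one.mp hc
  rw [h c (by omega) (by omega)]

lemma wmiss_congr (L : List Int) (m : Int) (nd : Int → Int) (l r l' r' : Int)
    (h : ∀ c : Int, 1 ≤ c → c ≤ m → wcnt L l r c = wcnt L l' r' c) :
    wmiss L m nd l r = wmiss L m nd l' r' := by
  unfold wmiss
  congr 1
  apply List.map_congr_left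
  intro c hc
  have := PySem.List.mem_pyRange_one.mp hc
  rw [h c (by omega) (by omega)]

lemma wsat_le (L : List Int) (m : Int) (nd : Int → Int) (l r : Int) (hm : 0 ≤ m) :
    wsat L m nd l r ≤ m := by
  have h := mjr_sum_ite_le_len (PySem.List.pyRange 1 (m + 1) 1)
    (fun c => nd c ≤ wcnt L l r c)
  rw [PySem.List.length_pyRange_one] at h
  unfold wsat
  have : ((m + 1 - 1).toNat : Int) = m := by omega
  omega

lemma wsat_eq_iff (L : List Int) (m : Int) (nd : Int → Int) (l r : Int) (hm : 0 ≤ m) :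
    wsat L m nd l r = m ↔ wok L m nd l r := by
  have h := mjr_sum_ite_eq_len_iff (PySem.List.pyRange 1 (m + 1) 1)
    (fun c => nd c ≤ wcnt L l r c)
  rw [PySem.List.length_pyRange_one] at h
  have hlen : (((m + 1 - 1).toNat : Nat) : Int) = m := by omega
  unfold wsat wok
  rw [hlen] at h
  rw [h]
  constructor
  · intro h2 c h1c hcm
    exact h2 c (PySem.List.mem_pyRange_one.mpr (by omega))
  · intro h2 c hc
    have := PySem.List.mem_pyRange_one.mp hc
    exact h2 c (by omega) (by omega)

lemma wmiss_eq_zero_iff (L : List Int) (m : Int) (nd : Int → Int) (l r : Int) :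
    wmiss L m nd l r = 0 ↔ wok L m nd l r := by
  have h := mjr_sum_ite_eq_zero_iff (PySem.List.pyRange 1 (m + 1) 1)
    (fun c => wcnt L l r c < nd c)
  unfold wmiss wok
  rw [h]
  constructor
  · intro h2 c h1c hcm
    have := h2 c (PySem.List.mem_pyRange_one.mpr (by omega))
    omega
  · intro h2 c hc
    have := PySem.List.mem_pyRange_one.mp hc
    have := h2 c (by omega) (by omega)
    omega

lemma wsat_add' (L : List Int) (m : Int) (nd : Int → Int) (l r : Int)
    (hl : 0 ≤ l) (hlr : l ≤ r) (hr : r.toNat < L.length)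
    (hx0 : 0 ≤ L.getD r.toNat 0) (hxm : L.getD r.toNat 0 ≤ m) (nd0 : nd 0 = 0) :
    wsat L m nd l (r + 1) = wsat L m nd l r +
      (if wcnt L l (r + 1) (L.getD r.toNat 0) = nd (L.getD r.toNat 0) then 1 else 0) := by
  by_cases h1 : 1 ≤ L.getD r.toNat 0
  · have hupd := mjr_sum_update (fun c => if nd c ≤ wcnt L l r c then (1:Int) else 0)
      (fun c => if nd c ≤ wcnt L l (r + 1) c then (1:Int) else 0)
      1 (m + 1) (L.getD r.toNat 0) h1 (by omega)
      (fun c hc => by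
        beta_reduce
        rw [wcnt_add L l r c hl hlr hr, if_neg (show ¬ (L.getD r.toNat 0 = c) from fun h => hc h.symm), add_zero])
    unfold wsat
    rw [hupd]
    beta_reduce
    have hcx := wcnt_add L l r (L.getD r.toNat 0) hl hlr hr
    rw [if_pos rfl] at hcx
    rw [hcx]
    split_ifs <;> omega
  · have hx : L.getD r.toNat 0 = 0 := by omega
    have hcong : wsat L m nd l (r + 1) = wsat L m nd l r := by
      apply wsat_congr
      intro c hc1 hcm
      rw [wcnt_add L l r c hl hlr hr, if_neg (show ¬ (L.getD r.toNat 0 = c) by omega), add_zero]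
    have hfalse : ¬ (wcnt L l (r + 1) (L.getD r.toNat 0) = nd (L.getD r.toNat 0)) := by
      rw [hx, nd0]
      have hcx := wcnt_add L l r (0:Int) hl hlr hr
      rw [hx] at hcx
      rw [if_pos rfl] at hcx
      have := wcnt_nonneg L l r 0
      omega
    rw [hcong, if_neg hfalse]
    ring_nf

lemma wmiss_add' (L : List Int) (m : Int) (nd : Int → Int) (l r : Int)
    (hl : 0 ≤ l) (hlr : l ≤ r) (hr : r.toNat < L.length)
    (hx0 : 0 ≤ L.getD r.toNat 0) (hxm : L.getD r.toNat 0 ≤ m) (nd0 : nd 0 = 0) :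
    wmiss L m nd l (r + 1) = wmiss L m nd l r -
      (if wcnt L l (r + 1) (L.getD r.toNat 0) = nd (L.getD r.toNat 0) then 1 else 0) := by
  by_cases h1 : 1 ≤ L.getD r.toNat 0
  · have hupd := mjr_sum_update (fun c => if wcnt L l r c < nd c then (1:Int) else 0)
      (fun c => if wcnt L l (r + 1) c < nd c then (1:Int) else 0)
      1 (m + 1) (L.getD r.toNat 0) h1 (by omega)
      (fun c hc => by
        beta_reduce
        rw [wcnt_add L l r c hl hlr hr, if_neg (show ¬ (L.getD r.toNat 0 = c) from fun h => hc h.symm), add_zero])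
    unfold wmiss
    rw [hupd]
    beta_reduce
    have hcx := wcnt_add L l r (L.getD r.toNat 0) hl hlr hr
    rw [if_pos rfl] at hcx
    rw [hcx]
    split_ifs <;> omega
  · have hx : L.getD r.toNat 0 = 0 := by omega
    have hcong : wmiss L m nd l (r + 1) = wmiss L m nd l r := by
      apply wmiss_congr
      intro c hc1 hcm
      rw [wcnt_add L l r c hl hlr hr, if_neg (show ¬ (L.getD r.toNat 0 = c) by omega), add_zero]
    have hfalse : ¬ (wcnt L l (r + 1) (L.getD r.toNat 0) = nd (L.getD r.toNat 0)) := by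
      rw [hx, nd0]
      have hcx := wcnt_add L l r (0:Int) hl hlr hr
      rw [hx] at hcx
      rw [if_pos rfl] at hcx
      have := wcnt_nonneg L l r 0
      omega
    rw [hcong, if_neg hfalse]
    ring_nf

lemma wwaste_add (L : List Int) (m : Int) (nd : Int → Int) (l r : Int)
    (hl : 0 ≤ l) (hlr : l ≤ r) (hr : r.toNat < L.length)
    (hx0 : 0 ≤ L.getD r.toNat 0) (hxm : L.getD r.toNat 0 ≤ m) :
    wwaste L m nd l (r + 1) = wwaste L m nd l r +
      (if nd (L.getD r.toNat 0) < wcnt L l (r + 1) (L.getD r.toNat 0) then 1 else 0) := by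
  have hupd := mjr_sum_update
    (fun c => if nd c ≤ wcnt L l r c then wcnt L l r c - nd c else 0)
    (fun c => if nd c ≤ wcnt L l (r + 1) c then wcnt L l (r + 1) c - nd c else 0)
    0 (m + 1) (L.getD r.toNat 0) hx0 (by omega)
    (fun c hc => by
      beta_reduce
      rw [wcnt_add L l r c hl hlr hr, if_neg (show ¬ (L.getD r.toNat 0 = c) from fun h => hc h.symm), add_zero])
  unfold wwaste
  rw [hupd]
  beta_reduce
  have hcx := wcnt_add L l r (L.getD r.toNat 0) hl hlr hr
  rw [if_pos rfl] at hcx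
  rw [hcx]
  split_ifs <;> omega

lemma wsat_sub' (L : List Int) (m : Int) (nd : Int → Int) (l r : Int)
    (hl : 0 ≤ l) (hlr : l < r) (hr : r.toNat ≤ L.length)
    (hx0 : 0 ≤ L.getD l.toNat 0) (hxm : L.getD l.toNat 0 ≤ m) (nd0 : nd 0 = 0) :
    wsat L m nd (l + 1) r = wsat L m nd l r -
      (if wcnt L l r (L.getD l.toNat 0) = nd (L.getD l.toNat 0) then 1 else 0) := by
  by_cases h1 : 1 ≤ L.getD l.toNat 0
  · have hupd := mjr_sum_update (fun c => if nd c ≤ wcnt L l r c then (1:Int) else 0)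
      (fun c => if nd c ≤ wcnt L (l + 1) r c then (1:Int) else 0)
      1 (m + 1) (L.getD l.toNat 0) h1 (by omega)
      (fun c hc => by
        beta_reduce
        rw [wcnt_sub L l r c hl hlr hr, if_neg (show ¬ (L.getD l.toNat 0 = c) from fun h => hc h.symm), sub_zero])
    unfold wsat
    rw [hupd]
    beta_reduce
    have hcx := wcnt_sub L l r (L.getD l.toNat 0) hl hlr hr
    rw [if_pos rfl] at hcx
    rw [hcx]
    split_ifs <;> omega
  · have hx : L.getD l.toNat 0 = 0 := by omega
    have hcong : wsat L m nd (l + 1) r = wsat L m nd l r := by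
      apply wsat_congr
      intro c hc1 hcm
      rw [wcnt_sub L l r c hl hlr hr, if_neg (show ¬ (L.getD l.toNat 0 = c) by omega), sub_zero]
    have hfalse : ¬ (wcnt L l r (L.getD l.toNat 0) = nd (L.getD l.toNat 0)) := by
      rw [hx, nd0]
      have hhead := wcnt_head L l r hl hlr hr
      rw [hx] at hhead
      omega
    rw [hcong, if_neg hfalse]
    ring_nf

-- removing the left element of a window increments wmiss exactly when that color was met exactly
lemma wmiss_sub' (L : List Int) (m : Int) (nd : Int → Int) (l r : Int)
    (hl : 0 ≤ l) (hlr : l < r) (hr : r.toNat ≤ L.length)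
    (hx0 : 0 ≤ L.getD l.toNat 0) (hxm : L.getD l.toNat 0 ≤ m) (nd0 : nd 0 = 0) :
    wmiss L m nd (l + 1) r = wmiss L m nd l r +
      (if wcnt L l r (L.getD l.toNat 0) = nd (L.getD l.toNat 0) then 1 else 0) := by
  by_cases h1 : 1 ≤ L.getD l.toNat 0
  · have hupd := mjr_sum_update (fun c => if wcnt L l r c < nd c then (1:Int) else 0)
      (fun c => if wcnt L (l + 1) r c < nd c then (1:Int) else 0)
      1 (m + 1) (L.getD l.toNat 0) h1 (by omega)
      (fun c hc => by
        beta_reduce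
        rw [wcnt_sub L l r c hl hlr hr, if_neg (show ¬ (L.getD l.toNat 0 = c) from fun h => hc h.symm), sub_zero])
    unfold wmiss
    rw [hupd]
    beta_reduce
    have hcx := wcnt_sub L l r (L.getD l.toNat 0) hl hlr hr
    rw [if_pos rfl] at hcx
    rw [hcx]
    split_ifs <;> omega
  · have hx : L.getD l.toNat 0 = 0 := by omega
    have hcong : wmiss L m nd (l + 1) r = wmiss L m nd l r := by
      apply wmiss_congr
      intro c hc1 hcm
      rw [wcnt_sub L l r c hl hlr hr, if_neg (show ¬ (L.getD l.toNat 0 = c) by omega), sub_zero]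
    have hfalse : ¬ (wcnt L l r (L.getD l.toNat 0) = nd (L.getD l.toNat 0)) := by
      rw [hx, nd0]
      have hhead := wcnt_head L l r hl hlr hr
      rw [hx] at hhead
      omega
    rw [hcong, if_neg hfalse]
    ring_nf

lemma wwaste_sub (L : List Int) (m : Int) (nd : Int → Int) (l r : Int)
    (hl : 0 ≤ l) (hlr : l < r) (hr : r.toNat ≤ L.length)
    (hx0 : 0 ≤ L.getD l.toNat 0) (hxm : L.getD l.toNat 0 ≤ m) :
    wwaste L m nd (l + 1) r = wwaste L m nd l r -
      (if nd (L.getD l.toNat 0) < wcnt L l r (L.getD l.toNat 0) then 1 else 0) := by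
  have hupd := mjr_sum_update
    (fun c => if nd c ≤ wcnt L l r c then wcnt L l r c - nd c else 0)
    (fun c => if nd c ≤ wcnt L (l + 1) r c then wcnt L (l + 1) r c - nd c else 0)
    0 (m + 1) (L.getD l.toNat 0) hx0 (by omega)
    (fun c hc => by
      beta_reduce
      rw [wcnt_sub L l r c hl hlr hr, if_neg (show ¬ (L.getD l.toNat 0 = c) from fun h => hc h.symm), sub_zero])
  unfold wwaste
  rw [hupd]
  beta_reduce
  have hcx := wcnt_sub L l r (L.getD l.toNat 0) hl hlr hr
  rw [if_pos rfl] at hcx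
  rw [hcx]
  split_ifs <;> omega

lemma wok_mono_r (L : List Int) (m : Int) (nd : Int → Int) (l r r' : Int)
    (hl : 0 ≤ l) (hlr : l ≤ r) (hrr : r ≤ r') (hr' : r'.toNat ≤ L.length)
    (h : wok L m nd l r) : wok L m nd l r' :=
  fun c h1 h2 => le_trans (h c h1 h2) (wcnt_mono_r L l r r' c hl hlr hrr hr')

lemma wok_anti_l (L : List Int) (m : Int) (nd : Int → Int) (l l' r : Int)
    (hl : 0 ≤ l) (hll : l ≤ l') (h : wok L m nd l' r) : wok L m nd l r :=
  fun c h1 h2 => le_trans (h c h1 h2) (wcnt_anti_l L l l' r c hl hll)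

lemma wok_lt (L : List Int) (m : Int) (nd : Int → Int) (l r : Int)
    (hnd : ∀ c : Int, 1 ≤ c → c ≤ m → 0 ≤ nd c)
    (hnz : ¬ ∀ c : Int, 1 ≤ c → c ≤ m → nd c = 0)
    (h : wok L m nd l r) : l < r := by
  push_neg at hnz
  obtain ⟨c0, h1, h2, h3⟩ := hnz
  have hc := h c0 h1 h2
  have := hnd c0 h1 h2
  exact wcnt_pos_lt L l r c0 (by omega)

-- totals, Sval, counter-list representation, misc bridges
lemma mjr_sum_count (m : Int) (w : List Int) (hw : ∀ x ∈ w, 0 ≤ x ∧ x ≤ m) :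
    ((PySem.List.pyRange 0 (m + 1) 1).map (fun c => ((w.count c : Nat) : Int))).sum
      = w.length := by
  induction w with
  | nil => simp
  | cons x xs ih =>
    have hx := hw x List.mem_cons_self
    have hupd := mjr_sum_update (fun c => ((xs.count c : Nat) : Int))
      (fun c => (((x :: xs).count c : Nat) : Int)) 0 (m + 1) x hx.1 (by omega)
      (fun c hc => by
        beta_reduce
        rw [List.count_cons]
        simp [beq_iff_eq, hc]
        omega)
    rw [hupd, ih (fun y hy => hw y (List.mem_cons_of_mem x hy))]
    beta_reduce
    rw [List.count_cons]
    simp [beq_iff_eq]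
    all_goals (push_cast; ring)

lemma window_mem (L : List Int) (a b : Nat) (y : Int) (h : y ∈ (L.take b).drop a) : y ∈ L :=
  List.mem_of_mem_take (List.mem_of_mem_drop h)

lemma window_len (L : List Int) (l r : Int) (hl : 0 ≤ l) (hlr : l ≤ r)
    (hr : r.toNat ≤ L.length) :
    (((L.take r.toNat).drop l.toNat).length : Int) = r - l := by
  simp [List.length_drop, List.length_take]
  omega

lemma wwaste_of_ok (L : List Int) (m : Int) (nd : Int → Int) (l r : Int)
    (hm : 0 ≤ m) (hl : 0 ≤ l) (hlr : l ≤ r) (hr : r.toNat ≤ L.length)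
    (nd0 : nd 0 = 0) (hL : ∀ x ∈ L, 0 ≤ x ∧ x ≤ m) (hok : wok L m nd l r) :
    wwaste L m nd l r = (r - l) - Sval m nd := by
  unfold wwaste
  have h1 : (PySem.List.pyRange 0 (m + 1) 1).map
        (fun c => if nd c ≤ wcnt L l r c then wcnt L l r c - nd c else 0)
      = (PySem.List.pyRange 0 (m + 1) 1).map (fun c => wcnt L l r c - nd c) := by
    apply List.map_congr_left
    intro c hc
    have hcb := PySem.List.mem_pyRange_one.mp hc
    rcases eq_or_lt_of_le (show (0:Int) ≤ c by omega) with rfl | hc1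
    · rw [if_pos (by rw [nd0]; exact wcnt_nonneg L l r 0)]
    · rw [if_pos (hok c (by omega) (by omega))]
  rw [h1, mjr_sum_map_sub]
  have h2 : (PySem.List.pyRange 0 (m + 1) 1).map (fun c => wcnt L l r c)
      = (PySem.List.pyRange 0 (m + 1) 1).map
        (fun c => ((((L.take r.toNat).drop l.toNat).count c : Nat) : Int)) := rfl
  rw [h2, mjr_sum_count m _ (fun y hy => hL y (window_mem L _ _ y hy)),
      window_len L l r hl hlr hr]
  have h3 : PySem.List.pyRange 0 (m + 1) 1 = 0 :: PySem.List.pyRange 1 (m + 1) 1 :=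
    PySem.List.pyRange_one_cons (by omega)
  rw [h3]
  simp only [List.map_cons, List.sum_cons, nd0]
  unfold Sval
  ring

lemma wwaste_empty (L : List Int) (m : Int) (nd : Int → Int) (l : Int)
    (nd0 : nd 0 = 0) (hnd : ∀ c : Int, 1 ≤ c → c ≤ m → 0 ≤ nd c) :
    wwaste L m nd l l = 0 := by
  unfold wwaste
  apply List.sum_eq_zero
  intro y hy
  simp only [List.mem_map] at hy
  obtain ⟨c, hc, rfl⟩ := hy
  have hcb := PySem.List.mem_pyRange_one.mp hc
  rw [wcnt_empty L l l c le_rfl]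
  rcases eq_or_lt_of_le (show (0:Int) ≤ c by omega) with rfl | hc1
  · simp [nd0]
  · have := hnd c (by omega) (by omega)
    split <;> omega

lemma Sval_pos (m : Int) (nd : Int → Int)
    (hnd : ∀ c : Int, 1 ≤ c → c ≤ m → 0 ≤ nd c)
    (hnz : ¬ ∀ c : Int, 1 ≤ c → c ≤ m → nd c = 0) : 1 ≤ Sval m nd := by
  push_neg at hnz
  obtain ⟨c0, h1, h2, h3⟩ := hnz
  have hmem : nd c0 ∈ (PySem.List.pyRange 1 (m + 1) 1).map nd :=
    List.mem_map_of_mem (PySem.List.mem_pyRange_one.mpr (by omega))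
  have hle := List.single_le_sum (l := (PySem.List.pyRange 1 (m + 1) 1).map nd)
    (fun y hy => by
      obtain ⟨c, hc, rfl⟩ := List.mem_map.mp hy
      have := PySem.List.mem_pyRange_one.mp hc
      exact hnd c (by omega) (by omega)) _ hmem
  have := hnd c0 h1 h2
  unfold Sval
  omega

lemma Sval_zero (m : Int) (nd : Int → Int)
    (hz : ∀ c : Int, 1 ≤ c → c ≤ m → nd c = 0) : Sval m nd = 0 := by
  unfold Sval
  apply List.sum_eq_zero
  intro y hy
  obtain ⟨c, hc, rfl⟩ := List.mem_map.mp hy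
  have := PySem.List.mem_pyRange_one.mp hc
  exact hz c (by omega) (by omega)

-- counter-list representation
def creps (arr : List Int) (bnd : Int) (f : Int → Int) : Prop :=
  arr.length = (bnd + 1).toNat ∧
  ∀ c : Int, 0 ≤ c → c ≤ bnd → PySem.List.pyGetD arr c 0 = f c

lemma creps_replicate (bnd : Int) (hb : 0 ≤ bnd) :
    creps (List.replicate (bnd + 1).toNat 0) bnd (fun _ => 0) := by
  constructor
  · simp
  · intro c hc0 hcb
    beta_reduce
    rw [PySem.List.pyGetD_of_nonneg _ 0 hc0]
    simp [List.getD_eq_getElem?_getD, List.getElem?_replicate]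
    split <;> rfl

lemma creps_set (arr : List Int) (bnd : Int) (f : Int → Int) (h : creps arr bnd f)
    (x v : Int) (hx0 : 0 ≤ x) (hxb : x ≤ bnd) :
    creps (PySem.List.pySetD arr x v) bnd (fun c => if c = x then v else f c) := by
  obtain ⟨hlen, hget⟩ := h
  have hxlt : x.toNat < arr.length := by omega
  constructor
  · rw [PySem.List.pySetD_of_nonneg arr v hx0]
    simp [hlen]
  · intro c hc0 hcb
    beta_reduce
    have hx' : ((x.toNat : Nat) : Int) = x := by omega
    have hc' : ((c.toNat : Nat) : Int) = c := by omega
    rw [← hx', ← hc', PySem.List.pyGetD_pySetD_natCast arr x.toNat c.toNat v 0 hxlt]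
    by_cases hcx : c.toNat = x.toNat
    · rw [if_pos hcx, if_pos (by omega)]
    · rw [if_neg hcx, if_neg (by omega), hc']
      exact hget c hc0 hcb

lemma creps_congr (arr : List Int) (bnd : Int) (f f' : Int → Int)
    (h : creps arr bnd f) (hff : ∀ c : Int, 0 ≤ c → c ≤ bnd → f c = f' c) :
    creps arr bnd f' :=
  ⟨h.1, fun c hc0 hcb => (h.2 c hc0 hcb).trans (hff c hc0 hcb)⟩

-- relating pyGetD on the full list to the take-n prefix
lemma Lget_bridge (ls : List Int) (n j : Int) (hn : n ≤ (ls.length : Int))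
    (h0 : 0 ≤ j) (hj : j < n) :
    PySem.List.pyGetD ls j 0 = (ls.take n.toNat).getD j.toNat 0 := by
  rw [PySem.List.pyGetD_of_nonneg ls 0 h0]
  rw [List.getD_eq_getElem?_getD, List.getD_eq_getElem?_getD]
  congr 1
  rw [List.getElem?_take]
  rw [if_pos (by omega)]

lemma Lget_mem (L : List Int) (j : Int) (h : j.toNat < L.length) :
    L.getD j.toNat 0 ∈ L := by
  rw [List.getD_eq_getElem _ _ h]
  exact List.getElem_mem h

-- the A-side while loop does nothing once its condition is false
lemma whileA_stop (m n : Int) (ls C : List Int) (g : List Int) (sat waste pos : Int)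
    (h : ¬ (sat < m ∧ pos < n)) :
    ∀ fuel, mjrWhileA m n ls C fuel (g, sat, waste, pos) = (g, sat, waste, pos) := by
  intro fuel
  cases fuel with
  | zero => rfl
  | succ f => simp [mjrWhileA, if_neg h]

-- A-side invariants and loop lemmas
def INFC : Int := 1152921504606846976

def ansP (L : List Int) (m : Int) (nd : Int → Int) (n i a : Int) : Prop :=
  (∀ l r : Int, 0 ≤ l → l < i → l ≤ r → r ≤ n → wok L m nd l r → a ≤ r - l - Sval m nd) ∧
  (a = INFC ∨ ∃ l r : Int, 0 ≤ l ∧ l < i ∧ l ≤ r ∧ r ≤ n ∧ wok L m nd l r ∧ a = r - l - Sval m nd)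

def invGoodA (L : List Int) (m : Int) (nd : Int → Int) (n i : Int)
    (g : List Int) (sat waste pos : Int) : Prop :=
  i ≤ pos ∧ pos ≤ n ∧
  creps g n (wcnt L i pos) ∧
  sat = wsat L m nd i pos ∧
  waste = wwaste L m nd i pos ∧
  (∀ r : Int, i ≤ r → r < pos → ¬ wok L m nd i r)

def invDeadA (L : List Int) (m : Int) (nd : Int → Int) (n i : Int) (sat pos : Int) : Prop :=
  pos = n ∧ sat < m ∧ ¬ wok L m nd i n

lemma whileA_run (L C ls : List Int) (m n : Int) (nd : Int → Int)
    (hm : 0 ≤ m) (hL : (L.length : Int) = n)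
    (nd0 : nd 0 = 0)
    (hcol : ∀ x ∈ L, 0 ≤ x ∧ x ≤ m ∧ x ≤ n)
    (hCnd : ∀ c : Int, 0 ≤ c → c ≤ m → PySem.List.pyGetD C c 0 = nd c)
    (hlsL : ∀ j : Int, 0 ≤ j → j < n → PySem.List.pyGetD ls j 0 = L.getD j.toNat 0) :
    ∀ (fuel : Nat) (i : Int) (g : List Int) (sat waste pos : Int),
    0 ≤ i → invGoodA L m nd n i g sat waste pos → (n - pos).toNat ≤ fuel →
    ∃ g' sat' waste' pos',
      mjrWhileA m n ls C fuel (g, sat, waste, pos) = (g', sat', waste', pos') ∧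
      invGoodA L m nd n i g' sat' waste' pos' ∧
      pos ≤ pos' ∧ ¬ (sat' < m ∧ pos' < n) := by
  intro fuel
  induction fuel with
  | zero =>
    intro i g sat waste pos h0i hinv hfuel
    refine ⟨g, sat, waste, pos, rfl, hinv, le_rfl, ?_⟩
    obtain ⟨h1, h2, _⟩ := hinv
    omega
  | succ f ih =>
    intro i g sat waste pos h0i hinv hfuel
    obtain ⟨hip, hpn, hg, hsat, hwaste, hmin⟩ := hinv
    by_cases hc : sat < m ∧ pos < n
    · have hposlen : pos.toNat < L.length := by omega
      have hxeq : PySem.List.pyGetD ls pos 0 = L.getD pos.toNat 0 :=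
        hlsL pos (by omega) hc.2
      have hxmem := Lget_mem L pos hposlen
      obtain ⟨hx0, hxm, hxn⟩ := hcol _ hxmem
      have hgx : PySem.List.pyGetD g (L.getD pos.toNat 0) 0 = wcnt L i pos (L.getD pos.toNat 0) :=
        hg.2 _ hx0 hxn
      have hcnt := wcnt_add L i pos (L.getD pos.toNat 0) h0i hip hposlen
      rw [if_pos rfl] at hcnt
      have hg' : creps (PySem.List.pySetD g (L.getD pos.toNat 0)
            (wcnt L i pos (L.getD pos.toNat 0) + 1)) n (wcnt L i (pos + 1)) := by
        apply creps_congr _ _ _ _ (creps_set g n (wcnt L i pos) hg _ _ hx0 hxn)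
        intro c hc0 hcb
        beta_reduce
        by_cases hcx : c = L.getD pos.toNat 0
        · rw [if_pos hcx, hcx, hcnt]
        · rw [if_neg hcx, wcnt_add L i pos c h0i hip hposlen,
              if_neg (show ¬ (L.getD pos.toNat 0 = c) from fun h => hcx h.symm), add_zero]
      have hg'x : PySem.List.pyGetD (PySem.List.pySetD g (L.getD pos.toNat 0)
            (wcnt L i pos (L.getD pos.toNat 0) + 1)) (L.getD pos.toNat 0) 0
          = wcnt L i (pos + 1) (L.getD pos.toNat 0) :=
        hg'.2 _ hx0 hxn
      have hCx : PySem.List.pyGetD C (L.getD pos.toNat 0) 0 = nd (L.getD pos.toNat 0) :=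
        hCnd _ hx0 hxm
      have hmin' : ∀ r : Int, i ≤ r → r < pos + 1 → ¬ wok L m nd i r := by
        intro r hir hrp
        by_cases hrpos : r < pos
        · exact hmin r hir hrpos
        · have : r = pos := by omega
          subst this
          rw [← wsat_eq_iff L m nd i r hm]
          omega
      have hsat' := wsat_add' L m nd i pos h0i hip hposlen hx0 hxm nd0
      have hwaste' := wwaste_add L m nd i pos h0i hip hposlen hx0 hxm
      simp only [mjrWhileA, if_pos hc]
      rw [hxeq, hgx, hg'x, hCx]
      by_cases hb1 : wcnt L i (pos + 1) (L.getD pos.toNat 0) = nd (L.getD pos.toNat 0)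
      · rw [if_pos hb1]
        have hinvN : invGoodA L m nd n i
            (PySem.List.pySetD g (L.getD pos.toNat 0) (wcnt L i pos (L.getD pos.toNat 0) + 1))
            (sat + 1) waste (pos + 1) := by
          refine ⟨by omega, by omega, hg', ?_, ?_, hmin'⟩
          · rw [hsat', if_pos hb1, hsat]
          · rw [hwaste', if_neg (by omega), hwaste]; ring
        obtain ⟨g2, s2, w2, p2, heq2, hinv2, hple2, hex2⟩ :=
          ih i _ (sat + 1) waste (pos + 1) h0i hinvN (by omega)
        exact ⟨g2, s2, w2, p2, heq2, hinv2, by omega, hex2⟩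
      · rw [if_neg hb1]
        by_cases hb2 : wcnt L i (pos + 1) (L.getD pos.toNat 0) > nd (L.getD pos.toNat 0)
        · rw [if_pos hb2]
          have hinvN : invGoodA L m nd n i
              (PySem.List.pySetD g (L.getD pos.toNat 0) (wcnt L i pos (L.getD pos.toNat 0) + 1))
              sat (waste + 1) (pos + 1) := by
            refine ⟨by omega, by omega, hg', ?_, ?_, hmin'⟩
            · rw [hsat', if_neg hb1, hsat]; ring
            · rw [hwaste', if_pos hb2, hwaste]
          obtain ⟨g2, s2, w2, p2, heq2, hinv2, hple2, hex2⟩ :=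
            ih i _ sat (waste + 1) (pos + 1) h0i hinvN (by omega)
          exact ⟨g2, s2, w2, p2, heq2, hinv2, by omega, hex2⟩
        · rw [if_neg hb2]
          have hinvN : invGoodA L m nd n i
              (PySem.List.pySetD g (L.getD pos.toNat 0) (wcnt L i pos (L.getD pos.toNat 0) + 1))
              sat waste (pos + 1) := by
            refine ⟨by omega, by omega, hg', ?_, ?_, hmin'⟩
            · rw [hsat', if_neg hb1, hsat]; ring
            · rw [hwaste', if_neg hb2, hwaste]; ring
          obtain ⟨g2, s2, w2, p2, heq2, hinv2, hple2, hex2⟩ :=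
            ih i _ sat waste (pos + 1) h0i hinvN (by omega)
          exact ⟨g2, s2, w2, p2, heq2, hinv2, by omega, hex2⟩
    · refine ⟨g, sat, waste, pos, ?_, ⟨hip, hpn, hg, hsat, hwaste, hmin⟩, le_rfl, hc⟩
      simp only [mjrWhileA, if_neg hc]

lemma stepA_spec (L C ls : List Int) (m n : Int) (nd : Int → Int)
    (hm : 0 ≤ m) (hL : (L.length : Int) = n) (hnINF : n < INFC)
    (nd0 : nd 0 = 0)
    (hnd : ∀ c : Int, 1 ≤ c → c ≤ m → 0 ≤ nd c)
    (hnz : ¬ ∀ c : Int, 1 ≤ c → c ≤ m → nd c = 0)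
    (hcol : ∀ x ∈ L, 0 ≤ x ∧ x ≤ m ∧ x ≤ n)
    (hCnd : ∀ c : Int, 0 ≤ c → c ≤ m → PySem.List.pyGetD C c 0 = nd c)
    (hlsL : ∀ j : Int, 0 ≤ j → j < n → PySem.List.pyGetD ls j 0 = L.getD j.toNat 0)
    (i : Int) (g : List Int) (sat waste pos ans : Int)
    (h0i : 0 ≤ i) (hin : i < n)
    (hinv : invGoodA L m nd n i g sat waste pos ∨ invDeadA L m nd n i sat pos)
    (hans : ansP L m nd n i ans) :
    ∃ g' sat' waste' pos' ans',
      mjrStepA m n ls C (g, sat, waste, pos, ans) i = (g', sat', waste', pos', ans') ∧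
      (invGoodA L m nd n (i+1) g' sat' waste' pos' ∨ invDeadA L m nd n (i+1) sat' pos') ∧
      ansP L m nd n (i+1) ans' := by
  have hS1 : 1 ≤ Sval m nd := Sval_pos m nd hnd hnz
  have hilen : i.toNat < L.length := by omega
  have hrceq : PySem.List.pyGetD ls i 0 = L.getD i.toNat 0 := hlsL i h0i hin
  have hrcmem := Lget_mem L i hilen
  obtain ⟨hrc0, hrcm, hrcn⟩ := hcol _ hrcmem
  have hCrc : PySem.List.pyGetD C (L.getD i.toNat 0) 0 = nd (L.getD i.toNat 0) :=
    hCnd _ hrc0 hrcm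
  rcases hinv with hG | hD
  · -- good state
    obtain ⟨g1, sat1, waste1, pos1, heq, hinv1, hple, hexit⟩ :=
      whileA_run L C ls m n nd hm hL nd0 hcol hCnd hlsL (n - pos).toNat i g sat waste pos
        h0i hG le_rfl
    obtain ⟨hip1, hpn1, hg1, hsat1, hwaste1, hmin1⟩ := hinv1
    have hsatle : sat1 ≤ m := hsat1 ▸ wsat_le L m nd i pos1 hm
    simp only [mjrStepA]
    rw [heq]
    simp only []
    by_cases hsm : sat1 = m
    · -- window is valid
      have hok : wok L m nd i pos1 := (wsat_eq_iff L m nd i pos1 hm).mp (by omega)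
      have hipos : i < pos1 := wok_lt L m nd i pos1 hnd hnz hok
      have hwv : waste1 = (pos1 - i) - Sval m nd := by
        rw [hwaste1]
        exact wwaste_of_ok L m nd i pos1 hm h0i (by omega) (by omega) nd0
          (fun x hx => ⟨(hcol x hx).1, (hcol x hx).2.1⟩) hok
      have hwub : waste1 < INFC := by omega
      have hansP' : ansP L m nd n (i+1) (min ans waste1) := by
        constructor
        · intro l r hl0 hli1 hlr hrn hok2
          by_cases hli : l < i
          · exact le_trans (min_le_left _ _) (hans.1 l r hl0 hli hlr hrn hok2)
          · have hleq : l = i := by omega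
            subst hleq
            have hrpos : pos1 ≤ r := by
              by_contra hcon
              exact hmin1 r hlr (by omega) hok2
            calc min ans waste1 ≤ waste1 := min_le_right _ _
              _ ≤ r - l - Sval m nd := by omega
        · by_cases hw : waste1 ≤ ans
          · right
            exact ⟨i, pos1, h0i, by omega, by omega, hpn1, hok,
              by rw [min_eq_right hw]; omega⟩
          · have hmin_eq : min ans waste1 = ans := min_eq_left (by omega)
            rcases hans.2 with hI | ⟨l, r, hl0, hli, hlr, hrn, hok2, hval⟩
            · exfalso; omega
            · right
              exact ⟨l, r, hl0, by omega, hlr, hrn, hok2, by omega⟩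
      rw [if_pos hsm]
      have hgrc : PySem.List.pyGetD g1 (L.getD i.toNat 0) 0 = wcnt L i pos1 (L.getD i.toNat 0) :=
        hg1.2 _ hrc0 hrcn
      have hcnt1 : 1 ≤ wcnt L i pos1 (L.getD i.toNat 0) :=
        wcnt_head L i pos1 h0i hipos (by omega)
      have hge : nd (L.getD i.toNat 0) ≤ wcnt L i pos1 (L.getD i.toNat 0) := by
        by_cases h1 : 1 ≤ L.getD i.toNat 0
        · exact hok _ h1 hrcm
        · have h00 : L.getD i.toNat 0 = 0 := by omega
          rw [h00, nd0]
          exact wcnt_nonneg L i pos1 0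
      have hcnt := wcnt_sub L i pos1 (L.getD i.toNat 0) h0i hipos (by omega)
      rw [if_pos rfl] at hcnt
      have hg' : creps (PySem.List.pySetD g1 (L.getD i.toNat 0)
            (wcnt L i pos1 (L.getD i.toNat 0) - 1)) n (wcnt L (i+1) pos1) := by
        apply creps_congr _ _ _ _ (creps_set g1 n (wcnt L i pos1) hg1 _ _ hrc0 hrcn)
        intro c hc0 hcb
        beta_reduce
        by_cases hcx : c = L.getD i.toNat 0
        · rw [if_pos hcx, hcx, hcnt]
        · rw [if_neg hcx, wcnt_sub L i pos1 c h0i hipos (by omega),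
              if_neg (show ¬ (L.getD i.toNat 0 = c) from fun h => hcx h.symm), sub_zero]
      have hsat' := wsat_sub' L m nd i pos1 h0i hipos (by omega) hrc0 hrcm nd0
      have hwaste' := wwaste_sub L m nd i pos1 h0i hipos (by omega) hrc0 hrcm
      have hmin' : ∀ r : Int, i + 1 ≤ r → r < pos1 → ¬ wok L m nd (i+1) r := by
        intro r hir hrp hok2
        exact hmin1 r (by omega) hrp (wok_anti_l L m nd i (i+1) r h0i (by omega) hok2)
      rw [hrceq, hgrc, hCrc]
      by_cases hb1 : wcnt L i pos1 (L.getD i.toNat 0) > nd (L.getD i.toNat 0)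
      · rw [if_pos hb1]
        refine ⟨_, _, _, _, _, rfl, Or.inl ⟨by omega, hpn1, hg', ?_, ?_, hmin'⟩, hansP'⟩
        · rw [hsat', if_neg (by omega), hsat1]; ring
        · rw [hwaste', if_pos hb1, hwaste1]
      · rw [if_neg hb1]
        have hb2 : wcnt L i pos1 (L.getD i.toNat 0) = nd (L.getD i.toNat 0) := by omega
        rw [if_pos hb2]
        refine ⟨_, _, _, _, _, rfl, Or.inl ⟨by omega, hpn1, hg', ?_, ?_, hmin'⟩, hansP'⟩
        · rw [hsat', if_pos hb2, hsat1]
        · rw [hwaste', if_neg (by omega), hwaste1]; ring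
    · -- while exited with pos1 = n, no valid window from i
      have hsatlt : sat1 < m := by omega
      have hpos1n : pos1 = n := by
        rcases not_and_or.mp hexit with h | h
        · exact absurd hsatlt h
        · omega
      have hnok : ¬ wok L m nd i n := by
        rw [← wsat_eq_iff L m nd i n hm]
        rw [← hpos1n]
        omega
      have hansP' : ansP L m nd n (i+1) ans := by
        constructor
        · intro l r hl0 hli1 hlr hrn hok2
          by_cases hli : l < i
          · exact hans.1 l r hl0 hli hlr hrn hok2
          · have hleq : l = i := by omega
            subst hleq
            exact absurd (wok_mono_r L m nd l r n hl0 hlr hrn (by omega) hok2) hnok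
        · rcases hans.2 with hI | ⟨l, r, h1, h2, h3, h4, h5, h6⟩
          · left; exact hI
          · right; exact ⟨l, r, h1, by omega, h3, h4, h5, h6⟩
      have hdead : ∀ s' : Int, s' ≤ sat1 → invDeadA L m nd n (i+1) s' pos1 :=
        fun s' hs' => ⟨hpos1n, by omega,
          fun hok2 => hnok (wok_anti_l L m nd i (i+1) n h0i (by omega) hok2)⟩
      rw [if_neg hsm, hrceq, hCrc]
      split_ifs with hb1 hb2
      · exact ⟨_, _, _, _, _, rfl, Or.inr (hdead _ le_rfl), hansP'⟩
      · exact ⟨_, _, _, _, _, rfl, Or.inr (hdead _ (by omega)), hansP'⟩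
      · exact ⟨_, _, _, _, _, rfl, Or.inr (hdead _ le_rfl), hansP'⟩
  · -- dead state
    obtain ⟨hpos, hsatlt, hnok⟩ := hD
    simp only [mjrStepA]
    rw [whileA_stop m n ls C g sat waste pos (by omega) _]
    simp only []
    have hansP' : ansP L m nd n (i+1) ans := by
      constructor
      · intro l r hl0 hli1 hlr hrn hok2
        by_cases hli : l < i
        · exact hans.1 l r hl0 hli hlr hrn hok2
        · have hleq : l = i := by omega
          subst hleq
          exact absurd (wok_mono_r L m nd l r n hl0 hlr hrn (by omega) hok2) hnok
      · rcases hans.2 with hI | ⟨l, r, h1, h2, h3, h4, h5, h6⟩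
        · left; exact hI
        · right; exact ⟨l, r, h1, by omega, h3, h4, h5, h6⟩
    have hdead : ∀ s' : Int, s' ≤ sat → invDeadA L m nd n (i+1) s' pos :=
      fun s' hs' => ⟨hpos, by omega,
        fun hok2 => hnok (wok_anti_l L m nd i (i+1) n h0i (by omega) hok2)⟩
    rw [if_neg (by omega : ¬ sat = m), hrceq, hCrc]
    split_ifs with hb1 hb2
    · exact ⟨_, _, _, _, _, rfl, Or.inr (hdead _ le_rfl), hansP'⟩
    · exact ⟨_, _, _, _, _, rfl, Or.inr (hdead _ (by omega)), hansP'⟩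
    · exact ⟨_, _, _, _, _, rfl, Or.inr (hdead _ le_rfl), hansP'⟩

lemma runA (L C ls : List Int) (m n : Int) (nd : Int → Int)
    (hm : 0 ≤ m) (hL : (L.length : Int) = n) (hnINF : n < INFC)
    (nd0 : nd 0 = 0)
    (hnd : ∀ c : Int, 1 ≤ c → c ≤ m → 0 ≤ nd c)
    (hnz : ¬ ∀ c : Int, 1 ≤ c → c ≤ m → nd c = 0)
    (hcol : ∀ x ∈ L, 0 ≤ x ∧ x ≤ m ∧ x ≤ n)
    (hCnd : ∀ c : Int, 0 ≤ c → c ≤ m → PySem.List.pyGetD C c 0 = nd c)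
    (hlsL : ∀ j : Int, 0 ≤ j → j < n → PySem.List.pyGetD ls j 0 = L.getD j.toNat 0) :
    ∀ (K : Nat) (i : Int) (g : List Int) (sat waste pos ans : Int),
    0 ≤ i → i ≤ n → (n - i).toNat = K →
    (invGoodA L m nd n i g sat waste pos ∨ invDeadA L m nd n i sat pos) →
    ansP L m nd n i ans →
    ansP L m nd n n
      (((PySem.List.pyRange i n 1).foldl (mjrStepA m n ls C) (g, sat, waste, pos, ans)).2.2.2.2) := by
  intro K
  induction K with
  | zero =>
    intro i g sat waste pos ans h0i hin hK hinv hans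
    have hni : i = n := by omega
    subst hni
    rw [PySem.List.pyRange_one_eq_nil le_rfl]
    simpa using hans
  | succ K ih =>
    intro i g sat waste pos ans h0i hin hK hinv hans
    have hlt : i < n := by omega
    rw [PySem.List.pyRange_one_cons hlt, List.foldl_cons]
    obtain ⟨g', sat', waste', pos', ans', heq, hinv', hans'⟩ :=
      stepA_spec L C ls m n nd hm hL hnINF nd0 hnd hnz hcol hCnd hlsL
        i g sat waste pos ans h0i hlt hinv hans
    rw [heq]
    exact ih (i+1) g' sat' waste' pos' ans' (by omega) (by omega) (by omega) hinv' hans'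

lemma runA_zero (L C ls : List Int) (m n : Int) (nd : Int → Int)
    (hm : 0 ≤ m) (hL : (L.length : Int) = n)
    (nd0 : nd 0 = 0)
    (hz : ∀ c : Int, 1 ≤ c → c ≤ m → nd c = 0)
    (hcol : ∀ x ∈ L, 0 ≤ x ∧ x ≤ m ∧ x ≤ n)
    (hCnd : ∀ c : Int, 0 ≤ c → c ≤ m → PySem.List.pyGetD C c 0 = nd c)
    (hlsL : ∀ j : Int, 0 ≤ j → j < n → PySem.List.pyGetD ls j 0 = L.getD j.toNat 0) :
    ∀ (K : Nat) (i : Int) (g : List Int),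
    1 ≤ i → i ≤ n → (n - i).toNat = K →
    creps g n (fun c => if c = L.getD (i-1).toNat 0 then -1 else 0) →
    ((PySem.List.pyRange i n 1).foldl (mjrStepA m n ls C) (g, m - 1, 0, i - 1, 0)).2.2.2.2
      = 0 := by
  intro K
  induction K with
  | zero =>
    intro i g h1i hin hK hg
    have hni : i = n := by omega
    subst hni
    rw [PySem.List.pyRange_one_eq_nil le_rfl]
    rfl
  | succ K ih =>
    intro i g h1i hin hK hg
    have hlt : i < n := by omega
    have hndz : ∀ c : Int, 0 ≤ c → c ≤ m → nd c = 0 := by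
      intro c hc0 hcm
      rcases eq_or_lt_of_le hc0 with rfl | h1
      · exact nd0
      · exact hz c (by omega) hcm
    -- the previously removed element
    have hplen : (i-1).toNat < L.length := by omega
    have hpeq : PySem.List.pyGetD ls (i-1) 0 = L.getD (i-1).toNat 0 :=
      hlsL (i-1) (by omega) (by omega)
    obtain ⟨hp0, hpm, hpn⟩ := hcol _ (Lget_mem L (i-1) hplen)
    -- current element
    have hilen : i.toNat < L.length := by omega
    have hieq : PySem.List.pyGetD ls i 0 = L.getD i.toNat 0 := hlsL i (by omega) hlt
    obtain ⟨hi0, him, hin'⟩ := hcol _ (Lget_mem L i hilen)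
    rw [PySem.List.pyRange_one_cons hlt, List.foldl_cons]
    -- evaluate the step
    have hfuel : ∃ f : Nat, (n - (i-1)).toNat = f + 1 := ⟨(n - i).toNat, by omega⟩
    obtain ⟨f, hf⟩ := hfuel
    have hgp : PySem.List.pyGetD g (L.getD (i-1).toNat 0) 0 = -1 := by
      have h := hg.2 _ hp0 hpn
      beta_reduce at h
      rw [if_pos rfl] at h
      exact h
    have hg2 : creps (PySem.List.pySetD g (L.getD (i-1).toNat 0) 0) n (fun _ => 0) := by
      apply creps_congr _ _ _ _ (creps_set g n _ hg _ _ hp0 hpn)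
      intro c hc0 hcb
      beta_reduce
      split <;> simp
    have hwhile : mjrWhileA m n ls C ((n - (i-1)).toNat)
        (g, m - 1, 0, i - 1)
        = (PySem.List.pySetD g (L.getD (i-1).toNat 0) 0, m, 0, i) := by
      rw [hf]
      simp only [mjrWhileA]
      rw [if_pos (by constructor <;> omega)]
      rw [hpeq, hgp]
      have hgetset : PySem.List.pyGetD
          (PySem.List.pySetD g (L.getD (i-1).toNat 0) (-1 + 1)) (L.getD (i-1).toNat 0) 0 = 0 := by
        have h := (creps_set g n _ hg (L.getD (i-1).toNat 0) (-1 + 1) hp0 hpn).2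
          (L.getD (i-1).toNat 0) hp0 hpn
        beta_reduce at h
        rw [if_pos rfl] at h
        rw [h]
        norm_num
      rw [hgetset, hCnd _ hp0 hpm, hndz _ hp0 hpm]
      rw [if_pos rfl]
      have hii : i - 1 + 1 = i := by ring
      have hmm1 : m - 1 + 1 = m := by ring
      rw [hii, hmm1]
      have hstop := whileA_stop m n ls C
        (PySem.List.pySetD g (L.getD (i-1).toNat 0) (-1 + 1)) m 0 i (by omega) f
      rw [hstop]
      norm_num
    simp only [mjrStepA]
    rw [hwhile]
    simp only []
    have hgi : PySem.List.pyGetD (PySem.List.pySetD g (L.getD (i-1).toNat 0) 0)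
        (L.getD i.toNat 0) 0 = 0 := hg2.2 _ hi0 hin'
    rw [hieq, hgi, hCnd _ hi0 him, hndz _ hi0 him]
    rw [if_neg (by omega : ¬ ((0:Int) > 0)), if_pos (rfl : (0:Int) = 0)]
    simp only [if_true, min_self]
    have hg3 : creps (PySem.List.pySetD (PySem.List.pySetD g (L.getD (i-1).toNat 0) 0)
          (L.getD i.toNat 0) (0 - 1)) n
        (fun c => if c = L.getD ((i+1)-1).toNat 0 then -1 else 0) := by
      apply creps_congr _ _ _ _ (creps_set _ n _ hg2 _ (0-1) hi0 hin')
      intro c hc0 hcb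
      beta_reduce
      have : ((i+1)-1).toNat = i.toNat := by omega
      rw [this]
      split <;> norm_num
    have hihz := ih (i+1) _ (by omega) (by omega) (by omega) hg3
    have hii2 : i + 1 - 1 = i := by ring
    rw [hii2] at hihz
    exact hihz

-- B-side: feasibility of a window length, check correctness, binary search
def feasW (L : List Int) (m : Int) (nd : Int → Int) (n len : Int) : Prop :=
  ∃ l : Int, 0 ≤ l ∧ l + len ≤ n ∧ wok L m nd l (l + len)

-- the element-adding loop of check's first phase
lemma addLoop_run (L C ls : List Int) (m n W : Int) (nd : Int → Int)
    (hm : 0 ≤ m) (hL : (L.length : Int) = n)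
    (nd0 : nd 0 = 0)
    (hcol : ∀ x ∈ L, 0 ≤ x ∧ x ≤ m ∧ x ≤ n)
    (hCnd : ∀ c : Int, 0 ≤ c → c ≤ m → PySem.List.pyGetD C c 0 = nd c)
    (hlsL : ∀ j : Int, 0 ≤ j → j < n → PySem.List.pyGetD ls j 0 = L.getD j.toNat 0)
    (hWn : W ≤ n) :
    ∀ (K : Nat) (j : Int) (count : List Int) (missing : Int),
    0 ≤ j → j ≤ W → (W - j).toNat = K →
    creps count m (wcnt L 0 j) → missing = wmiss L m nd 0 j →
    ∃ count' missing',
      (PySem.List.pyRange j W 1).foldl (mjrAddStep C ls) (count, missing) = (count', missing') ∧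
      creps count' m (wcnt L 0 W) ∧ missing' = wmiss L m nd 0 W := by
  intro K
  induction K with
  | zero =>
    intro j count missing h0j hjW hK hcr hms
    have : j = W := by omega
    subst this
    rw [PySem.List.pyRange_one_eq_nil le_rfl]
    exact ⟨count, missing, rfl, hcr, hms⟩
  | succ K ih =>
    intro j count missing h0j hjW hK hcr hms
    have hlt : j < W := by omega
    have hjlen : j.toNat < L.length := by omega
    have hxeq : PySem.List.pyGetD ls j 0 = L.getD j.toNat 0 := hlsL j h0j (by omega)
    obtain ⟨hx0, hxm, hxn⟩ := hcol _ (Lget_mem L j hjlen)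
    have hcx : PySem.List.pyGetD count (L.getD j.toNat 0) 0 = wcnt L 0 j (L.getD j.toNat 0) :=
      hcr.2 _ hx0 hxm
    have hcnt := wcnt_add L 0 j (L.getD j.toNat 0) le_rfl h0j hjlen
    rw [if_pos rfl] at hcnt
    have hcr1 : creps (PySem.List.pySetD count (L.getD j.toNat 0)
          (wcnt L 0 j (L.getD j.toNat 0) + 1)) m (wcnt L 0 (j+1)) := by
      apply creps_congr _ _ _ _ (creps_set count m (wcnt L 0 j) hcr _ _ hx0 hxm)
      intro c hc0 hcb
      beta_reduce
      by_cases hcx2 : c = L.getD j.toNat 0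
      · rw [if_pos hcx2, hcx2, hcnt]
      · rw [if_neg hcx2, wcnt_add L 0 j c le_rfl h0j hjlen,
            if_neg (show ¬ (L.getD j.toNat 0 = c) from fun h => hcx2 h.symm), add_zero]
    have hcx1 : PySem.List.pyGetD (PySem.List.pySetD count (L.getD j.toNat 0)
          (wcnt L 0 j (L.getD j.toNat 0) + 1)) (L.getD j.toNat 0) 0
        = wcnt L 0 (j+1) (L.getD j.toNat 0) := hcr1.2 _ hx0 hxm
    have hCx : PySem.List.pyGetD C (L.getD j.toNat 0) 0 = nd (L.getD j.toNat 0) :=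
      hCnd _ hx0 hxm
    have hms1 := wmiss_add' L m nd 0 j le_rfl h0j hjlen hx0 hxm nd0
    rw [PySem.List.pyRange_one_cons hlt, List.foldl_cons]
    simp only [mjrAddStep]
    rw [hxeq, hcx, hcx1, hCx]
    apply ih (j+1) _ _ (by omega) (by omega) (by omega) hcr1
    rw [hms1, hms]
    split_ifs <;> ring

-- check's rolling second loop returns true iff some later window of length W is valid
lemma slide_run (L C ls : List Int) (m n W : Int) (nd : Int → Int)
    (hm : 0 ≤ m) (hL : (L.length : Int) = n)
    (nd0 : nd 0 = 0)
    (hcol : ∀ x ∈ L, 0 ≤ x ∧ x ≤ m ∧ x ≤ n)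
    (hCnd : ∀ c : Int, 0 ≤ c → c ≤ m → PySem.List.pyGetD C c 0 = nd c)
    (hlsL : ∀ j : Int, 0 ≤ j → j < n → PySem.List.pyGetD ls j 0 = L.getD j.toNat 0)
    (h1W : 1 ≤ W) :
    ∀ (K : Nat) (j : Int) (count : List Int) (missing : Int),
    W ≤ j → j ≤ n → (n - j).toNat = K →
    creps count m (wcnt L (j - W) j) → missing = wmiss L m nd (j - W) j →
    ((mjrSlide C ls W (PySem.List.pyRange j n 1) (count, missing) = true) ↔
      ∃ r : Int, j < r ∧ r ≤ n ∧ wok L m nd (r - W) r) := by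
  intro K
  induction K with
  | zero =>
    intro j count missing hWj hjn hK hcr hms
    have : j = n := by omega
    subst this
    rw [PySem.List.pyRange_one_eq_nil le_rfl]
    simp only [mjrSlide]
    constructor
    · intro h; exact absurd h (by simp)
    · rintro ⟨r, h1, h2, _⟩; omega
  | succ K ih =>
    intro j count missing hWj hjn hK hcr hms
    have hlt : j < n := by omega
    have hjlen : j.toNat < L.length := by omega
    have hl0 : (0:Int) ≤ j - W := by omega
    -- the added right element
    have hxeq : PySem.List.pyGetD ls j 0 = L.getD j.toNat 0 := hlsL j (by omega) hlt
    obtain ⟨hx0, hxm, hxn⟩ := hcol _ (Lget_mem L j hjlen)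
    have hcx : PySem.List.pyGetD count (L.getD j.toNat 0) 0
        = wcnt L (j - W) j (L.getD j.toNat 0) := hcr.2 _ hx0 hxm
    have hcnt := wcnt_add L (j - W) j (L.getD j.toNat 0) hl0 (by omega) hjlen
    rw [if_pos rfl] at hcnt
    have hcr1 : creps (PySem.List.pySetD count (L.getD j.toNat 0)
          (wcnt L (j - W) j (L.getD j.toNat 0) + 1)) m (wcnt L (j - W) (j+1)) := by
      apply creps_congr _ _ _ _ (creps_set count m (wcnt L (j - W) j) hcr _ _ hx0 hxm)
      intro c hc0 hcb
      beta_reduce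
      by_cases hcx2 : c = L.getD j.toNat 0
      · rw [if_pos hcx2, hcx2, hcnt]
      · rw [if_neg hcx2, wcnt_add L (j - W) j c hl0 (by omega) hjlen,
            if_neg (show ¬ (L.getD j.toNat 0 = c) from fun h => hcx2 h.symm), add_zero]
    have hcx1 : PySem.List.pyGetD (PySem.List.pySetD count (L.getD j.toNat 0)
          (wcnt L (j - W) j (L.getD j.toNat 0) + 1)) (L.getD j.toNat 0) 0
        = wcnt L (j - W) (j+1) (L.getD j.toNat 0) := hcr1.2 _ hx0 hxm
    have hCx : PySem.List.pyGetD C (L.getD j.toNat 0) 0 = nd (L.getD j.toNat 0) := hCnd _ hx0 hxm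
    have hms1 : (if wcnt L (j - W) (j+1) (L.getD j.toNat 0) = nd (L.getD j.toNat 0)
          then missing - 1 else missing) = wmiss L m nd (j - W) (j+1) := by
      have h := wmiss_add' L m nd (j - W) j hl0 (by omega) hjlen hx0 hxm nd0
      rw [h, hms]
      split_ifs <;> ring
    -- the removed left element
    have hdlen : (j - W).toNat < L.length := by omega
    have hdeq : PySem.List.pyGetD ls (j - W) 0 = L.getD (j - W).toNat 0 :=
      hlsL (j - W) hl0 (by omega)
    obtain ⟨hd0, hdm, hdn⟩ := hcol _ (Lget_mem L (j - W) hdlen)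
    have hcd : PySem.List.pyGetD (PySem.List.pySetD count (L.getD j.toNat 0)
          (wcnt L (j - W) j (L.getD j.toNat 0) + 1)) (L.getD (j - W).toNat 0) 0
        = wcnt L (j - W) (j+1) (L.getD (j - W).toNat 0) := hcr1.2 _ hd0 hdm
    have hCd : PySem.List.pyGetD C (L.getD (j - W).toNat 0) 0 = nd (L.getD (j - W).toNat 0) :=
      hCnd _ hd0 hdm
    have hcnt2 := wcnt_sub L (j - W) (j+1) (L.getD (j - W).toNat 0) hl0 (by omega) (by omega)
    rw [if_pos rfl] at hcnt2
    have hms2 : (if wcnt L (j - W) (j+1) (L.getD (j - W).toNat 0) = nd (L.getD (j - W).toNat 0)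
          then wmiss L m nd (j - W) (j+1) + 1 else wmiss L m nd (j - W) (j+1))
        = wmiss L m nd ((j - W) + 1) (j+1) := by
      have h := wmiss_sub' L m nd (j - W) (j+1) hl0 (by omega) (by omega) hd0 hdm nd0
      rw [h]
      split_ifs <;> ring
    have hcr2 : creps (PySem.List.pySetD
          (PySem.List.pySetD count (L.getD j.toNat 0) (wcnt L (j - W) j (L.getD j.toNat 0) + 1))
          (L.getD (j - W).toNat 0) (wcnt L (j - W) (j+1) (L.getD (j - W).toNat 0) - 1)) m
        (wcnt L ((j - W) + 1) (j+1)) := by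
      apply creps_congr _ _ _ _ (creps_set _ m (wcnt L (j - W) (j+1)) hcr1 _ _ hd0 hdm)
      intro c hc0 hcb
      beta_reduce
      by_cases hcx2 : c = L.getD (j - W).toNat 0
      · rw [if_pos hcx2, hcx2, hcnt2]
      · rw [if_neg hcx2, wcnt_sub L (j - W) (j+1) c hl0 (by omega) (by omega),
            if_neg (show ¬ (L.getD (j - W).toNat 0 = c) from fun h => hcx2 h.symm), sub_zero]
    -- unfold one slide step
    rw [PySem.List.pyRange_one_cons hlt]
    simp only [mjrSlide, mjrAddStep]
    rw [hxeq, hcx, hcx1, hCx, hdeq, hcd, hCd, hms1, hms2]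
    have hshift : j + 1 - W = (j - W) + 1 := by ring
    by_cases hz2 : wmiss L m nd ((j - W) + 1) (j+1) = 0
    · rw [if_pos hz2]
      have hokj : wok L m nd ((j+1) - W) (j+1) := by
        rw [hshift]
        exact (wmiss_eq_zero_iff L m nd ((j - W) + 1) (j+1)).mp hz2
      constructor
      · intro _
        exact ⟨j + 1, by omega, by omega, hokj⟩
      · intro _; rfl
    · rw [if_neg hz2]
      have hIH := ih (j+1) _ _ (by omega) (by omega) (by omega)
        (by rw [hshift]; exact hcr2) (by rw [hshift])
      rw [hIH]
      constructor
      · rintro ⟨r, h1, h2, h3⟩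
        exact ⟨r, by omega, h2, h3⟩
      · rintro ⟨r, h1, h2, h3⟩
        by_cases hr : r = j + 1
        · exfalso
          apply hz2
          rw [wmiss_eq_zero_iff]
          have : r - W = (j - W) + 1 := by omega
          rw [this, hr] at h3
          exact h3
        · exact ⟨r, by omega, h2, h3⟩

-- Source B's check(L) decides feasibility of window length W
lemma check_iff (L C ls : List Int) (m n : Int) (nd : Int → Int)
    (hm : 0 ≤ m) (hL : (L.length : Int) = n)
    (nd0 : nd 0 = 0)
    (hcol : ∀ x ∈ L, 0 ≤ x ∧ x ≤ m ∧ x ≤ n)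
    (hCnd : ∀ c : Int, 0 ≤ c → c ≤ m → PySem.List.pyGetD C c 0 = nd c)
    (hlsL : ∀ j : Int, 0 ≤ j → j < n → PySem.List.pyGetD ls j 0 = L.getD j.toNat 0)
    (bm : Int) (hbm : bm = wmiss L m nd 0 0)
    (W : Int) (h0W : 0 ≤ W) (hWn : W ≤ n) :
    ((mjrCheck n m C ls bm W = true) ↔ feasW L m nd n W) := by
  by_cases hW0 : W = 0
  · subst hW0
    unfold mjrCheck
    rw [if_pos rfl]
    simp only [beq_iff_eq]
    rw [hbm, wmiss_eq_zero_iff]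
    constructor
    · intro hok
      refine ⟨0, le_rfl, by omega, ?_⟩
      intro c h1 h2
      rw [wcnt_empty L 0 (0 + 0) c (by omega)]
      have := hok c h1 h2
      rwa [wcnt_empty L 0 0 c le_rfl] at this
    · rintro ⟨l, hl0, hln, hok⟩
      intro c h1 h2
      rw [wcnt_empty L 0 0 c le_rfl]
      have := hok c h1 h2
      rwa [wcnt_empty L l (l + 0) c (by omega)] at this
  · unfold mjrCheck
    rw [if_neg hW0]
    have h1W : 1 ≤ W := by omega
    obtain ⟨count', missing', heq, hcr', hms'⟩ :=
      addLoop_run L C ls m n W nd hm hL nd0 hcol hCnd hlsL hWn W.toNat 0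
        (List.replicate (m + 1).toNat 0) bm le_rfl (by omega) (by omega)
        (creps_congr _ _ _ _ (creps_replicate m hm)
          (fun c _ _ => (wcnt_empty L 0 0 c le_rfl).symm))
        hbm
    rw [heq]
    simp only []
    by_cases hz2 : missing' = 0
    · rw [if_pos hz2]
      have hok : wok L m nd 0 W := by
        rw [← wmiss_eq_zero_iff]; omega
      constructor
      · intro _
        refine ⟨0, le_rfl, by omega, ?_⟩
        have : (0:Int) + W = W := by ring
        rwa [this]
      · intro _; rfl
    · rw [if_neg hz2]
      have hslide := slide_run L C ls m n W nd hm hL nd0 hcol hCnd hlsL h1W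
        (n - W).toNat W count' missing' le_rfl hWn rfl
        (by
          have : W - W = (0:Int) := by ring
          rwa [this])
        (by
          have : W - W = (0:Int) := by ring
          rw [this]; omega)
      rw [hslide]
      constructor
      · rintro ⟨r, h1, h2, h3⟩
        refine ⟨r - W, by omega, by omega, ?_⟩
        have : r - W + W = r := by ring
        rwa [this]
      · rintro ⟨l, hl0, hln, hok⟩
        refine ⟨l + W, ?_, hln, ?_⟩
        · by_cases hl : l = 0
          · exfalso
            apply hz2
            rw [hms', wmiss_eq_zero_iff]
            subst hl
            have : (0:Int) + W = W := by ring
            rwa [this] at hok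
          · omega
        · have : l + W - W = l := by ring
          rwa [this]

-- feasibility is monotone in the window length
lemma feas_mono (L : List Int) (m n : Int) (nd : Int → Int)
    (hL : (L.length : Int) = n) :
    ∀ (K : Nat) (a b : Int), 0 ≤ a → a ≤ b → b ≤ n → (b - a).toNat = K →
    feasW L m nd n a → feasW L m nd n b := by
  intro K
  induction K with
  | zero =>
    intro a b h0a hab hbn hK hf
    have : a = b := by omega
    subst this
    exact hf
  | succ K ih =>
    intro a b h0a hab hbn hK hf
    have hlt : a < b := by omega
    apply ih (a+1) b (by omega) (by omega) hbn (by omega)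
    obtain ⟨l, hl0, hln, hok⟩ := hf
    by_cases hend : l + a < n
    · refine ⟨l, hl0, by omega, ?_⟩
      have h := wok_mono_r L m nd l (l + a) (l + a + 1) hl0 (by omega) (by omega)
        (by omega) hok
      have : l + (a + 1) = l + a + 1 := by ring
      rwa [this]
    · have hl1 : 1 ≤ l := by omega
      refine ⟨l - 1, by omega, by omega, ?_⟩
      have h := wok_anti_l L m nd (l - 1) l (l + a) (by omega) (by omega) hok
      have : l - 1 + (a + 1) = l + a := by ring
      rwa [this]

-- the binary search finds the least length accepted by a monotone predicate
lemma bsearch_run (P : Int → Bool) (n : Int)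
    (Hmono : ∀ a b : Int, 0 ≤ a → a ≤ b → b ≤ n → P a = true → P b = true) :
    ∀ (fuel : Nat) (lo hi : Int), 0 ≤ lo → lo ≤ hi → hi ≤ n → (hi - lo).toNat ≤ fuel →
    P hi = true → (∀ X : Int, 0 ≤ X → X < lo → P X = false) →
    lo ≤ mjrBsearch P fuel lo hi ∧ mjrBsearch P fuel lo hi ≤ hi ∧
    P (mjrBsearch P fuel lo hi) = true ∧
    (∀ X : Int, 0 ≤ X → X < mjrBsearch P fuel lo hi → P X = false) := by
  intro fuel
  induction fuel with
  | zero =>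
    intro lo hi h0lo hlohi hhin hfuel hPhi hlow
    have heq : lo = hi := by omega
    simp only [mjrBsearch]
    subst heq
    exact ⟨le_rfl, le_rfl, hPhi, hlow⟩
  | succ f ih =>
    intro lo hi h0lo hlohi hhin hfuel hPhi hlow
    by_cases hlt : lo < hi
    · have hmid : lo ≤ PySem.Int.floordiv (lo + hi) 2 ∧ PySem.Int.floordiv (lo + hi) 2 < hi := by
        rw [PySem.Int.floordiv_eq_ediv_of_pos (by omega : (0:Int) < 2)]
        omega
      simp only [mjrBsearch]
      rw [if_pos hlt]
      cases hP : P (PySem.Int.floordiv (lo + hi) 2) with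
      | true =>
        simp only [hP, if_true]
        have h := ih lo (PySem.Int.floordiv (lo + hi) 2) h0lo (by omega) (by omega)
          (by omega) hP hlow
        exact ⟨h.1, by omega, h.2.2.1, h.2.2.2⟩
      | false =>
        simp only [hP, Bool.false_eq_true, if_false]
        have hlow' : ∀ X : Int, 0 ≤ X → X < PySem.Int.floordiv (lo + hi) 2 + 1 → P X = false := by
          intro X h0X hX
          by_cases hXlo : X < lo
          · exact hlow X h0X hXlo
          · cases hPX : P X with
            | false => rfl
            | true =>
              exfalso
              have := Hmono X (PySem.Int.floordiv (lo + hi) 2) h0X (by omega) (by omega) hPX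
              rw [this] at hP
              exact absurd hP (by simp)
        have h := ih (PySem.Int.floordiv (lo + hi) 2 + 1) hi (by omega) (by omega) hhin
          (by omega) hPhi hlow'
        exact ⟨by omega, h.2.1, h.2.2.1, h.2.2.2⟩
    · have heq : lo = hi := by omega
      simp only [mjrBsearch]
      rw [if_neg hlt]
      subst heq
      exact ⟨le_rfl, le_rfl, hPhi, hlow⟩

-- initial-state computations
lemma nd_nonneg_of (dc : List Int) (m c : Int) (hm : m ≤ (dc.length : Int))
    (hds : ∀ d ∈ dc.take m.toNat, 0 ≤ d) (h1 : 1 ≤ c) (hcm : c ≤ m) :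
    0 ≤ PySem.List.pyGetD (0 :: dc) c 0 := by
  rw [PySem.List.pyGetD_of_nonneg _ 0 (by omega)]
  have hct : c.toNat = (c.toNat - 1) + 1 := by omega
  rw [hct, List.getD_cons_succ]
  have hj : c.toNat - 1 < dc.length := by omega
  rw [List.getD_eq_getElem dc 0 hj]
  apply hds
  have hjt : c.toNat - 1 < (dc.take m.toNat).length := by
    simp [List.length_take]; omega
  have hq : (dc.take m.toNat)[c.toNat - 1]'hjt = dc[c.toNat - 1]'hj := List.getElem_take
  rw [← hq]
  exact List.getElem_mem hjt

lemma sat0_eq (L dc : List Int) (m : Int) (nd : Int → Int)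
    (hnd : ∀ c : Int, 1 ≤ c → c ≤ m → 0 ≤ nd c)
    (hCnd : ∀ c : Int, 0 ≤ c → c ≤ m → PySem.List.pyGetD (0 :: dc) c 0 = nd c) :
    (PySem.List.pyRange 1 (m + 1) 1).foldl
      (fun s i => if PySem.List.pyGetD (0 :: dc) i 0 = 0 then s + 1 else s) 0
      = wsat L m nd 0 0 := by
  rw [mjr_foldl_count (PySem.List.pyRange 1 (m + 1) 1)
      (fun i => PySem.List.pyGetD (0 :: dc) i 0 = 0) 0, zero_add]
  unfold wsat
  congr 1
  apply List.map_congr_left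
  intro c hc
  have hcb := PySem.List.mem_pyRange_one.mp hc
  beta_reduce
  rw [hCnd c (by omega) (by omega), wcnt_empty L 0 0 c le_rfl]
  have := hnd c (by omega) (by omega)
  split_ifs <;> omega

lemma miss0_eq (L dc : List Int) (m : Int) (nd : Int → Int)
    (hCnd : ∀ c : Int, 0 ≤ c → c ≤ m → PySem.List.pyGetD (0 :: dc) c 0 = nd c) :
    (PySem.List.pyRange 1 (m + 1) 1).foldl
      (fun s i => if PySem.List.pyGetD (0 :: dc) i 0 > 0 then s + 1 else s) 0
      = wmiss L m nd 0 0 := by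
  rw [mjr_foldl_count (PySem.List.pyRange 1 (m + 1) 1)
      (fun i => PySem.List.pyGetD (0 :: dc) i 0 > 0) 0, zero_add]
  unfold wmiss
  congr 1
  apply List.map_congr_left
  intro c hc
  have hcb := PySem.List.mem_pyRange_one.mp hc
  beta_reduce
  rw [hCnd c (by omega) (by omega), wcnt_empty L 0 0 c le_rfl]

lemma S0_eq (dc : List Int) (m : Int) (nd : Int → Int)
    (hCnd : ∀ c : Int, 0 ≤ c → c ≤ m → PySem.List.pyGetD (0 :: dc) c 0 = nd c) :
    (PySem.List.pyRange 1 (m + 1) 1).foldl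
      (fun s i => s + PySem.List.pyGetD (0 :: dc) i 0) 0
      = Sval m nd := by
  rw [mjr_foldl_addf (PySem.List.pyRange 1 (m + 1) 1)
      (fun i => PySem.List.pyGetD (0 :: dc) i 0) 0, zero_add]
  unfold Sval
  congr 1
  apply List.map_congr_left
  intro c hc
  have hcb := PySem.List.mem_pyRange_one.mp hc
  exact hCnd c (by omega) (by omega)

-- final assembly
lemma mjr_final (n m : Int) (ls dc : List Int)
    (hdomn : n ≤ 2147483648)
    (hpre : Pre_minimum_jedi_removals n m ls dc) :
    minimum_jedi_removals n m ls dc = minimum_jedi_removals_alt n m ls dc := by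
  rcases hpre with ⟨hnle, _⟩ | ⟨hnpos, hnlen, hm0, hmlen, hcols, hds⟩
  · -- n ≤ 0: A's outer loop never runs, B's guard fires; both return -1
    have hA : minimum_jedi_removals n m ls dc = -1 := by
      simp only [minimum_jedi_removals]
      rw [PySem.List.pyRange_one_eq_nil hnle]
      norm_num
    have hB : minimum_jedi_removals_alt n m ls dc = -1 := by
      simp only [minimum_jedi_removals_alt]
      rw [if_pos (Or.inl hnle)]
    rw [hA, hB]
  have hn0 : (0:Int) ≤ n := le_of_lt hnpos
  have hnINF : n < INFC := by
    have h2 : (2147483648:Int) < INFC := by decide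
    omega
  have hL : (((ls.take n.toNat).length : Nat) : Int) = n := by
    simp [List.length_take]
    omega
  have nd0 : (fun c : Int => PySem.List.pyGetD ((0 : Int) :: dc) c 0) 0 = 0 := by
    beta_reduce
    rw [PySem.List.pyGetD_of_nonneg _ 0 le_rfl]
    rfl
  have hCnd : ∀ c : Int, 0 ≤ c → c ≤ m →
      PySem.List.pyGetD ((0 : Int) :: dc) c 0
        = (fun c : Int => PySem.List.pyGetD ((0 : Int) :: dc) c 0) c := fun c _ _ => rfl
  have hndnn : ∀ c : Int, 1 ≤ c → c ≤ m →
      0 ≤ (fun c : Int => PySem.List.pyGetD ((0 : Int) :: dc) c 0) c :=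
    fun c h1 h2 => nd_nonneg_of dc m c hmlen hds h1 h2
  have hlsL : ∀ j : Int, 0 ≤ j → j < n →
      PySem.List.pyGetD ls j 0 = (ls.take n.toNat).getD j.toNat 0 :=
    fun j h0 hj => Lget_bridge ls n j hnlen h0 hj
  -- expose port A
  obtain ⟨aF, haF⟩ : ∃ aF, aF = ((PySem.List.pyRange 0 n 1).foldl (mjrStepA m n ls ((0:Int) :: dc))
      (List.replicate (n + 1).toNat 0,
       (PySem.List.pyRange 1 (m + 1) 1).foldl
         (fun s i => if PySem.List.pyGetD ((0:Int) :: dc) i 0 = 0 then s + 1 else s) 0,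
       0, 0, INFC)).2.2.2.2 := ⟨_, rfl⟩
  have hAeq : minimum_jedi_removals n m ls dc = if aF < INFC then aF else -1 := by
    rw [haF]; rfl
  rw [sat0_eq (ls.take n.toNat) dc m (fun c : Int => PySem.List.pyGetD ((0:Int) :: dc) c 0) hndnn hCnd] at haF
  -- expose port B
  obtain ⟨sm, hsm⟩ : ∃ sm : Int × Int, sm = (PySem.List.pyRange 1 (m + 1) 1).foldl
      (fun (p : Int × Int) i => (p.1 + PySem.List.pyGetD ((0:Int) :: dc) i 0,
        if PySem.List.pyGetD ((0:Int) :: dc) i 0 > 0 then p.2 + 1 else p.2)) (0, 0) := ⟨_, rfl⟩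
  have hBeq : minimum_jedi_removals_alt n m ls dc =
      (if n ≤ 0 ∨ ¬ (mjrCheck n m ((0:Int) :: dc) ls sm.2 n = true) then -1
       else mjrBsearch (mjrCheck n m ((0:Int) :: dc) ls sm.2) n.toNat 0 n - sm.1) := by
    rw [hsm]; rfl
  have hsm' : sm = ((PySem.List.pyRange 1 (m+1) 1).foldl
        (fun s i => s + PySem.List.pyGetD ((0:Int) :: dc) i 0) 0,
      (PySem.List.pyRange 1 (m+1) 1).foldl
        (fun s i => if PySem.List.pyGetD ((0:Int) :: dc) i 0 > 0 then s + 1 else s) 0) := by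
    rw [hsm, PySem.List.foldl_prod_mk (f := fun s i => s + PySem.List.pyGetD ((0:Int) :: dc) i 0)
      (g := fun s i => if PySem.List.pyGetD ((0:Int) :: dc) i 0 > 0 then s + 1 else s)]
  have hsm1 : sm.1 = Sval m (fun c : Int => PySem.List.pyGetD ((0 : Int) :: dc) c 0) := by
    rw [hsm']
    exact S0_eq dc m (fun c : Int => PySem.List.pyGetD ((0:Int) :: dc) c 0) hCnd
  have hsm2 : sm.2 = wmiss (ls.take n.toNat) m
      (fun c : Int => PySem.List.pyGetD ((0 : Int) :: dc) c 0) 0 0 := by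
    rw [hsm']
    exact miss0_eq (ls.take n.toNat) dc m (fun c : Int => PySem.List.pyGetD ((0:Int) :: dc) c 0) hCnd
  -- check decides feasibility, and feasibility is monotone
  have hciff : ∀ W : Int, 0 ≤ W → W ≤ n →
      ((mjrCheck n m ((0:Int) :: dc) ls sm.2 W = true) ↔
        feasW (ls.take n.toNat) m (fun c : Int => PySem.List.pyGetD ((0 : Int) :: dc) c 0) n W) :=
    fun W h1 h2 => check_iff (ls.take n.toNat) ((0:Int) :: dc) ls m n
      (fun c : Int => PySem.List.pyGetD ((0 : Int) :: dc) c 0) hm0 hL nd0 hcols hCnd hlsL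
      sm.2 hsm2 W h1 h2
  have hmono : ∀ a b : Int, 0 ≤ a → a ≤ b → b ≤ n →
      mjrCheck n m ((0:Int) :: dc) ls sm.2 a = true →
      mjrCheck n m ((0:Int) :: dc) ls sm.2 b = true := by
    intro a b ha hab hbn hPa
    exact (hciff b (by omega) hbn).mpr
      (feas_mono (ls.take n.toNat) m n (fun c : Int => PySem.List.pyGetD ((0 : Int) :: dc) c 0)
        hL (b - a).toNat a b ha hab hbn rfl ((hciff a ha (by omega)).mp hPa))
  by_cases hz : ∀ c : Int, 1 ≤ c → c ≤ m →
      (fun c : Int => PySem.List.pyGetD ((0 : Int) :: dc) c 0) c = 0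
  · -- all relevant desired counts are zero
    have hSz : Sval m (fun c : Int => PySem.List.pyGetD ((0 : Int) :: dc) c 0) = 0 :=
      Sval_zero m (fun c : Int => PySem.List.pyGetD ((0:Int) :: dc) c 0) hz
    by_cases hn00 : n = 0
    · have haF0 : aF = INFC := by
        rw [hn00] at haF
        rw [PySem.List.pyRange_one_eq_nil le_rfl] at haF
        simpa using haF
      rw [hAeq, hBeq, haF0, if_pos (Or.inl (le_of_eq hn00))]
      norm_num [INFC]
    · have hn1 : (0:Int) < n := by omega
      have hndz : ∀ c : Int, 0 ≤ c → c ≤ m →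
          (fun c : Int => PySem.List.pyGetD ((0 : Int) :: dc) c 0) c = 0 := by
        intro c hc0 hcm
        rcases eq_or_lt_of_le hc0 with rfl | h1
        · exact nd0
        · exact hz c (by omega) hcm
      have hsat0m : wsat (ls.take n.toNat) m
          (fun c : Int => PySem.List.pyGetD ((0 : Int) :: dc) c 0) 0 0 = m := by
        rw [wsat_eq_iff _ m _ 0 0 hm0]
        intro c h1 h2
        rw [hz c h1 h2, wcnt_empty _ 0 0 c le_rfl]
      have h0len : (0:Int).toNat < (ls.take n.toNat).length := by omega
      have hls0 : PySem.List.pyGetD ls 0 0 = (ls.take n.toNat).getD (0:Int).toNat 0 :=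
        hlsL 0 le_rfl (by omega)
      obtain ⟨hy0, hym, hyn⟩ := hcols _ (Lget_mem (ls.take n.toNat) 0 h0len)
      have hg00 : PySem.List.pyGetD (List.replicate (n + 1).toNat (0:Int))
          ((ls.take n.toNat).getD (0:Int).toNat 0) 0 = 0 := by
        have h := (creps_replicate n hn0).2 _ hy0 hyn
        beta_reduce at h
        exact h
      have hC0 : PySem.List.pyGetD ((0:Int) :: dc)
          ((ls.take n.toNat).getD (0:Int).toNat 0) 0 = 0 := hndz _ hy0 hym
      have hstep0 : mjrStepA m n ls ((0:Int) :: dc)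
          (List.replicate (n + 1).toNat (0:Int), m, 0, 0, INFC) 0
          = (PySem.List.pySetD (List.replicate (n + 1).toNat (0:Int))
              ((ls.take n.toNat).getD (0:Int).toNat 0) (-1), m - 1, 0, 0, 0) := by
        simp only [mjrStepA]
        rw [whileA_stop m n ls ((0:Int) :: dc) _ m 0 0 (by omega) _]
        simp only []
        rw [hls0, hg00, hC0]
        norm_num [INFC, min_def]
      rw [PySem.List.pyRange_one_cons hn1, List.foldl_cons, hsat0m, hstep0] at haF
      have hg1 : creps (PySem.List.pySetD (List.replicate (n + 1).toNat (0:Int))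
            ((ls.take n.toNat).getD (0:Int).toNat 0) (-1)) n
          (fun c => if c = (ls.take n.toNat).getD ((1:Int) - 1).toNat 0 then -1 else 0) := by
        apply creps_congr _ _ _ _ (creps_set _ n _ (creps_replicate n hn0) _ (-1) hy0 hyn)
        intro c hc0 hcb
        beta_reduce
        norm_num
      have hrz := runA_zero (ls.take n.toNat) ((0:Int) :: dc) ls m n
        (fun c : Int => PySem.List.pyGetD ((0:Int) :: dc) c 0) hm0 hL nd0 hz hcols
        hCnd hlsL (n - 1).toNat 1 _ le_rfl (by omega) (by omega) hg1
      norm_num at hrz haF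
      rw [hrz] at haF
      -- B side: the empty window is already feasible, so the least feasible length is 0
      have hf0 : feasW (ls.take n.toNat) m
          (fun c : Int => PySem.List.pyGetD ((0 : Int) :: dc) c 0) n 0 := by
        refine ⟨0, le_rfl, by omega, ?_⟩
        intro c h1 h2
        rw [hz c h1 h2, wcnt_empty _ 0 (0 + 0) c (by omega)]
      have hP0 : mjrCheck n m ((0:Int) :: dc) ls sm.2 0 = true :=
        (hciff 0 le_rfl hn0).mpr hf0
      have hPn : mjrCheck n m ((0:Int) :: dc) ls sm.2 n = true :=
        hmono 0 n le_rfl hn0 le_rfl hP0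
      have hbs := bsearch_run (mjrCheck n m ((0:Int) :: dc) ls sm.2) n hmono
        n.toNat 0 n le_rfl hn0 le_rfl (by omega) hPn
        (fun X h1 h2 => absurd h2 (by omega))
      have hres : mjrBsearch (mjrCheck n m ((0:Int) :: dc) ls sm.2) n.toNat 0 n = 0 := by
        by_contra hne
        have h1 := hbs.1
        have := hbs.2.2.2 0 le_rfl (by omega)
        rw [hP0] at this
        exact absurd this (by simp)
      rw [hAeq, hBeq, haF, if_neg (fun hcon => Or.elim hcon (fun h0 => by omega) (fun h2 => h2 hPn)), hres, hsm1, hSz]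
      norm_num [INFC]
  · -- some desired count is positive
    have hinvA0 : invGoodA (ls.take n.toNat) m
        (fun c : Int => PySem.List.pyGetD ((0 : Int) :: dc) c 0) n 0
        (List.replicate (n + 1).toNat 0)
        (wsat (ls.take n.toNat) m (fun c : Int => PySem.List.pyGetD ((0 : Int) :: dc) c 0) 0 0)
        0 0 := by
      refine ⟨le_rfl, hn0, ?_, rfl, (wwaste_empty (ls.take n.toNat) m (fun c : Int => PySem.List.pyGetD ((0:Int) :: dc) c 0) 0 nd0 hndnn).symm, ?_⟩
      · exact creps_congr _ _ _ _ (creps_replicate n hn0)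
          (fun c _ _ => (wcnt_empty (ls.take n.toNat) 0 0 c le_rfl).symm)
      · intro r h1 h2
        exfalso
        omega
    have hansP0 : ansP (ls.take n.toNat) m
        (fun c : Int => PySem.List.pyGetD ((0 : Int) :: dc) c 0) n 0 INFC := by
      constructor
      · intro l r h1 h2 h3 h4 h5
        exfalso
        omega
      · exact Or.inl rfl
    have hrun := runA (ls.take n.toNat) ((0:Int) :: dc) ls m n
      (fun c : Int => PySem.List.pyGetD ((0:Int) :: dc) c 0) hm0 hL hnINF nd0 hndnn hz
      hcols hCnd hlsL n.toNat 0 _ _ _ _ _ le_rfl hn0 (by omega) (Or.inl hinvA0) hansP0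
    rw [← haF] at hrun
    have hS1 : 1 ≤ Sval m (fun c : Int => PySem.List.pyGetD ((0 : Int) :: dc) c 0) :=
      Sval_pos m (fun c : Int => PySem.List.pyGetD ((0:Int) :: dc) c 0) hndnn hz
    by_cases hex : ∃ l r : Int, 0 ≤ l ∧ l ≤ r ∧ r ≤ n ∧
        wok (ls.take n.toNat) m (fun c : Int => PySem.List.pyGetD ((0 : Int) :: dc) c 0) l r
    · obtain ⟨l0, r0, h00, h01, h02, h03⟩ := hex
      have hl0r0 : l0 < r0 := wok_lt (ls.take n.toNat) m (fun c : Int => PySem.List.pyGetD ((0:Int) :: dc) c 0) l0 r0 hndnn hz h03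
      have hn1 : (1:Int) ≤ n := by omega
      have hfeas0 : feasW (ls.take n.toNat) m
          (fun c : Int => PySem.List.pyGetD ((0 : Int) :: dc) c 0) n (r0 - l0) := by
        refine ⟨l0, h00, by omega, ?_⟩
        have : l0 + (r0 - l0) = r0 := by ring
        rwa [this]
      have hfn : feasW (ls.take n.toNat) m
          (fun c : Int => PySem.List.pyGetD ((0 : Int) :: dc) c 0) n n :=
        feas_mono (ls.take n.toNat) m n _ hL (n - (r0 - l0)).toNat (r0 - l0) n
          (by omega) (by omega) le_rfl rfl hfeas0
      have hPn : mjrCheck n m ((0:Int) :: dc) ls sm.2 n = true :=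
        (hciff n hn0 le_rfl).mpr hfn
      have hbs := bsearch_run (mjrCheck n m ((0:Int) :: dc) ls sm.2) n hmono
        n.toNat 0 n le_rfl hn0 le_rfl (by omega) hPn
        (fun X h1 h2 => absurd h2 (by omega))
      obtain ⟨res, hresdef⟩ : ∃ r : Int,
          r = mjrBsearch (mjrCheck n m ((0:Int) :: dc) ls sm.2) n.toNat 0 n := ⟨_, rfl⟩
      rw [← hresdef] at hbs
      have hfres : feasW (ls.take n.toNat) m
          (fun c : Int => PySem.List.pyGetD ((0 : Int) :: dc) c 0) n res :=
        (hciff res (by omega) (by omega)).mp hbs.2.2.1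
      obtain ⟨lm, hlm0, hlmn, hokm⟩ := hfres
      have hlmlt : lm < lm + res := wok_lt (ls.take n.toNat) m
        (fun c : Int => PySem.List.pyGetD ((0:Int) :: dc) c 0) lm (lm + res) hndnn hz hokm
      have haFub := hrun.1 lm (lm + res) hlm0 (by omega) (by omega) hlmn hokm
      rcases hrun.2 with hI | ⟨la, ra, ha0, hlan, hara, hran, hoka, haval⟩
      · exfalso
        omega
      · have hlara : la < ra := wok_lt (ls.take n.toNat) m
          (fun c : Int => PySem.List.pyGetD ((0:Int) :: dc) c 0) la ra hndnn hz hoka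
        have hfa : feasW (ls.take n.toNat) m
            (fun c : Int => PySem.List.pyGetD ((0 : Int) :: dc) c 0) n (ra - la) := by
          refine ⟨la, ha0, by omega, ?_⟩
          have : la + (ra - la) = ra := by ring
          rwa [this]
        have hge : res ≤ ra - la := by
          by_contra hcon
          push_neg at hcon
          have h := hbs.2.2.2 (ra - la) (by omega) hcon
          rw [(hciff (ra - la) (by omega) (by omega)).mpr hfa] at h
          exact absurd h (by simp)
        have haFeq : aF = res - Sval m (fun c : Int => PySem.List.pyGetD ((0 : Int) :: dc) c 0) := by
          omega
        rw [hAeq, hBeq, if_pos (show aF < INFC by omega),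
            if_neg (fun hcon => Or.elim hcon (fun h0 => by omega) (fun h2 => h2 hPn)), ← hresdef, hsm1, haFeq]
    · push_neg at hex
      have haFI : aF = INFC := by
        rcases hrun.2 with hI | ⟨la, ra, ha0, hlan, hara, hran, hoka, _⟩
        · exact hI
        · exact absurd hoka (hex la ra ha0 hara hran)
      by_cases hn00 : n = 0
      · rw [hAeq, hBeq, haFI, if_pos (Or.inl (le_of_eq hn00))]
        norm_num [INFC]
      · have hPn : ¬ (mjrCheck n m ((0:Int) :: dc) ls sm.2 n = true) := by
          intro hPn
          obtain ⟨l, hl0, hln, hok⟩ := (hciff n hn0 le_rfl).mp hPn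
          exact hex l (l + n) hl0 (by omega) hln hok
        rw [hAeq, hBeq, haFI, if_pos (Or.inr hPn)]
        norm_num [INFC]


-- ===== VERDICT (by name: the statement is the Claim_ definition above) =====
theorem minimum_jedi_removals_spec : Claim_equal_minimum_jedi_removals := by
  unfold Claim_equal_minimum_jedi_removals
  intro n m lightsabers desired_counts hdom hpre
  unfold Spec_minimum_jedi_removals
  have hnb : n ≤ 2147483648 := by
    unfold Dom_minimum_jedi_removals pvDomInt at hdom
    simp only [Bool.and_eq_true, decide_eq_true_eq] at hdom
    exact hdom.1.1.1.2
  exact mjr_final n m lightsabers desired_counts hnb hpre
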